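-- pv_equiv track=rewrite | github.com/gh0stintheshe11/LeetCode-Solutions | solutions/3043.minimum-time-takes-to-reach-destination-without-drowning/Python3.py | minimumSeconds
-- ===== SOURCE A (Python) =====
-- from collections import deque
-- from typing import List, Tuple
--
-- def minimumSeconds(land: List[List[str]]) -> int:
--     def is_valid(x: int, y: int, n: int, m: int) -> bool:
--         return 0 <= x < n and 0 <= y < m
--
--     def bfs_flood_time() -> List[List[int]]:
--         flood_time = [[float('inf')] * m for _ in range(n)]
--         queue = deque()
--
--         for i in range(n):
--             for j in range(m):
--                 if land[i][j] == '*':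
--                     flood_time[i][j] = 0
--                     queue.append((i, j, 0))
--
--         directions = [(1, 0), (0, 1), (-1, 0), (0, -1)]
--         while queue:
--             x, y, t = queue.popleft()
--             for dx, dy in directions:
--                 nx, ny = x + dx, y + dy
--                 if is_valid(nx, ny, n, m) and land[nx][ny] == '.' and flood_time[nx][ny] > t + 1:
--                     flood_time[nx][ny] = t + 1
--                     queue.append((nx, ny, t + 1))
--         return flood_time
--
--     def bfs_minimum_time(flood_time: List[List[int]]) -> int:
--         queue = deque([(start_x, start_y, 0)])
--         visited = [[False] * m for _ in range(n)]
--         visited[start_x][start_y] = True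
--
--         while queue:
--             x, y, t = queue.popleft()
--             if (x, y) == (dest_x, dest_y):
--                 return t
--             for dx, dy in directions:
--                 nx, ny = x + dx, y + dy
--                 if is_valid(nx, ny, n, m) and not visited[nx][ny] and land[nx][ny] != 'X':
--                     if flood_time[nx][ny] > t + 1:
--                         visited[nx][ny] = True
--                         queue.append((nx, ny, t + 1))
--         return -1
--
--     n, m = len(land), len(land[0])
--     start_x = start_y = dest_x = dest_y = -1
--
--     for i in range(n):
--         for j in range(m):
--             if land[i][j] == 'S':
--                 start_x, start_y = i, j
--             elif land[i][j] == 'D':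
--                 dest_x, dest_y = i, j
--
--     directions = [(1, 0), (0, 1), (-1, 0), (0, -1)]
--
--     flood_time = bfs_flood_time()
--     return bfs_minimum_time(flood_time)
-- ===== SOURCE B (Python) =====
-- def minimumSeconds(land):
--     n, m = len(land), len(land[0])
--     start_x = start_y = dest_x = dest_y = -1
--     for i in range(n):
--         for j in range(m):
--             if land[i][j] == 'S':
--                 start_x, start_y = i, j
--             elif land[i][j] == 'D':
--                 dest_x, dest_y = i, j
--     directions = [(1, 0), (0, 1), (-1, 0), (0, -1)]
--     # lockstep simultaneous BFS: flood frontier and person frontier advance one layer per second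
--     flooded = [[land[i][j] == '*' for j in range(m)] for i in range(n)]
--     flood_front = [(i, j) for i in range(n) for j in range(m) if land[i][j] == '*']
--     visited = [[False] * m for _ in range(n)]
--     visited[start_x][start_y] = True
--     front = [(start_x, start_y)]
--     t = 0
--     while front:
--         if (dest_x, dest_y) in front:
--             return t
--         new_flood = []
--         for x, y in flood_front:
--             for dx, dy in directions:
--                 nx, ny = x + dx, y + dy
--                 if 0 <= nx < n and 0 <= ny < m and land[nx][ny] == '.' and not flooded[nx][ny]:
--                     flooded[nx][ny] = True
--                     new_flood.append((nx, ny))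
--         flood_front = new_flood
--         new_front = []
--         for x, y in front:
--             for dx, dy in directions:
--                 nx, ny = x + dx, y + dy
--                 if 0 <= nx < n and 0 <= ny < m and not visited[nx][ny] and land[nx][ny] != 'X' and not flooded[nx][ny]:
--                     visited[nx][ny] = True
--                     new_front.append((nx, ny))
--         front = new_front
--         t += 1
--     return -1
-- ===== Notes on version B (the rewrite author's own statement) =====
-- stated objective: alternative
-- what changed: Replaces A's two sequential timestamped-deque BFS passes (a full flood-time grid built first, then a person BFS consulting it) with a single lockstep level-synchronous BFS that advances a flood frontier and a person frontier one layer per second over boolean grids, never building the flood-time array.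
import Mathlib
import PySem

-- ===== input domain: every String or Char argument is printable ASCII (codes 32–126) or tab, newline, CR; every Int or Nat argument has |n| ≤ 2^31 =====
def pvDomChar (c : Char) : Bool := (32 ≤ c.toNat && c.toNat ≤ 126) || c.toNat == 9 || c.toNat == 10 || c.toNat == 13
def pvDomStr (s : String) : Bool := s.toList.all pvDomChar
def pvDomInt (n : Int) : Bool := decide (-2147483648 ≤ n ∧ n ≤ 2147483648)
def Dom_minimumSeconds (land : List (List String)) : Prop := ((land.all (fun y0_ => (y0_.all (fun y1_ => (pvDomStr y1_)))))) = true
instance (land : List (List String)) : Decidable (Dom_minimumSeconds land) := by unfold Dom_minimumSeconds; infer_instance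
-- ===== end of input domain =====

-- B replaces A's two sequential timestamped-deque BFS passes by one lockstep level-synchronous
-- BFS (flood frontier and person frontier advance one layer per second over boolean grids);
-- objective: alternative (same asymptotic cost, genuinely different algorithm structure).

-- ===== shared low-level helpers (both Pythons contain the identical constructs) =====

-- Python list write l[i] = a (negative index counts from the end, as in Python; out-of-range writes
-- cannot occur on inputs admitted by Pre_ except the harmless visited[-1][-1] wrap, which this mirrors)
def pvLset {α : Type} (l : List α) (i : Int) (a : α) : List α :=
  let j := if i < 0 then i + l.length else i
  if 0 ≤ j then l.set j.toNat a else l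

-- grid write g[i][j] = a
def pvSet2 {α : Type} (g : List (List α)) (i j : Int) (a : α) : List (List α) :=
  let r := if i < 0 then i + g.length else i
  if 0 ≤ r then g.set r.toNat (pvLset (g[r.toNat]?.getD []) j a) else g

-- grid read g[i][j] (only reached with 0 ≤ i < n, 0 ≤ j < m after is_valid on admitted inputs)
def pvGet2 {α : Type} (g : List (List α)) (i j : Int) (d : α) : α :=
  if 0 ≤ i ∧ 0 ≤ j then ((g[i.toNat]?.getD [])[j.toNat]?).getD d else d

def pvCell (land : List (List String)) (i j : Int) : String := pvGet2 land i j ""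

-- float('inf') is modelled as none; pvInfGt o v = (o > v), exact for the values A stores there
def pvInfGt (o : Option Int) (v : Int) : Bool :=
  match o with
  | none => true
  | some w => decide (v < w)

def pvDirs : List (Int × Int) := [(1, 0), (0, 1), (-1, 0), (0, -1)]

def pvValid (n m x y : Int) : Bool := decide (0 ≤ x ∧ x < n ∧ 0 ≤ y ∧ y < m)

-- one node's 'for dx, dy in directions' loop: test C on each neighbour, update the state with U
-- and append the accepted neighbour (both Pythons share this loop shape)
def pvStep {σ : Type} (C : σ → Int → Int → Bool) (U : σ → Int → Int → σ) (x y : Int)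
    (acc : σ × List (Int × Int)) : σ × List (Int × Int) :=
  pvDirs.foldl (fun a d =>
    let nx := x + d.1
    let ny := y + d.2
    if C a.1 nx ny then (U a.1 nx ny, a.2 ++ [(nx, ny)]) else a) acc

-- a whole frontier's expansion (one BFS layer), collecting the accepted neighbours in order
def pvExpand {σ : Type} (C : σ → Int → Int → Bool) (U : σ → Int → Int → σ)
    (s : σ) (front : List (Int × Int)) : σ × List (Int × Int) :=
  front.foldl (fun a p => pvStep C U p.1 p.2 a) (s, [])

-- the S/D scan (identical loop in both Pythons; last occurrence wins)
def pvFindSD (land : List (List String)) (n m : Int) : Int × Int × Int × Int :=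
  (PySem.List.pyRange 0 n 1).foldl (fun st i =>
    (PySem.List.pyRange 0 m 1).foldl (fun st j =>
      if pvCell land i j = "S" then (i, j, st.2.2.1, st.2.2.2)
      else if pvCell land i j = "D" then (st.1, st.2.1, i, j)
      else st) st) (-1, -1, -1, -1)

-- fuel for the while-loops (a totality guard only; provably sufficient, see the lemmas below)
def pvFuel (land : List (List String)) : Nat :=
  (land.length * (land.headD []).length + 5) * (land.length * (land.headD []).length + 5)

-- ===== PORT A =====

def pvCondFloodA (land : List (List String)) (n m t : Int) (g : List (List (Option Int))) (x y : Int) : Bool :=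
  pvValid n m x y && decide (pvCell land x y = ".") && pvInfGt (pvGet2 g x y none) (t + 1)

-- while queue: pop (x,y,t); relax the four neighbours into flood_time
def pvFloodLoopA (land : List (List String)) (n m : Int) :
    Nat → List (List (Option Int)) → List (Int × Int × Int) → List (List (Option Int))
  | 0, g, _ => g
  | _ + 1, g, [] => g
  | fuel + 1, g, (x, y, t) :: q =>
      let e := pvStep (pvCondFloodA land n m t) (fun g x y => pvSet2 g x y (some (t + 1))) x y (g, [])
      pvFloodLoopA land n m fuel e.1 (q ++ e.2.map (fun p => (p.1, p.2, t + 1)))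

def pvCondPersonA (land : List (List String)) (n m t : Int) (gInf : List (List (Option Int)))
    (vis : List (List Bool)) (x y : Int) : Bool :=
  pvValid n m x y && !(pvGet2 vis x y false) && decide (pvCell land x y ≠ "X") &&
    pvInfGt (pvGet2 gInf x y none) (t + 1)

-- while queue: pop (x,y,t); return t at the destination, else push admissible neighbours
def pvPersonLoopA (land : List (List String)) (n m dx dy : Int) (gInf : List (List (Option Int))) :
    Nat → List (List Bool) → List (Int × Int × Int) → Int
  | 0, _, _ => -1
  | _ + 1, _, [] => -1
  | fuel + 1, vis, (x, y, t) :: q =>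
      if x = dx ∧ y = dy then t
      else
        let e := pvStep (pvCondPersonA land n m t gInf) (fun v x y => pvSet2 v x y true) x y (vis, [])
        pvPersonLoopA land n m dx dy gInf fuel e.1 (q ++ e.2.map (fun p => (p.1, p.2, t + 1)))

def minimumSeconds (land : List (List String)) : Int :=
  let n : Int := land.length
  let m : Int := (land.headD []).length
  let sd := pvFindSD land n m
  -- flood_time = [[inf]*m for _ in range(n)]; seed the '*' cells with 0 and enqueue them row-major
  let init := (PySem.List.pyRange 0 n 1).foldl (fun st i =>
      (PySem.List.pyRange 0 m 1).foldl (fun st j =>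
        if pvCell land i j = "*" then (pvSet2 st.1 i j (some 0), st.2 ++ [(i, j, (0 : Int))]) else st) st)
    (List.replicate land.length (List.replicate (land.headD []).length (none : Option Int)),
     ([] : List (Int × Int × Int)))
  let gInf := pvFloodLoopA land n m (pvFuel land) init.1 init.2
  let vis0 := pvSet2 (List.replicate land.length (List.replicate (land.headD []).length false))
    sd.1 sd.2.1 true
  pvPersonLoopA land n m sd.2.2.1 sd.2.2.2 gInf (pvFuel land) vis0 [(sd.1, sd.2.1, 0)]

-- ===== PORT B =====

def pvCondFloodB (land : List (List String)) (n m : Int) (b : List (List Bool)) (x y : Int) : Bool :=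
  pvValid n m x y && decide (pvCell land x y = ".") && !(pvGet2 b x y false)

-- the flood frontier advances one layer into unflooded '.' cells
def pvFloodStepB (land : List (List String)) (n m : Int)
    (st : List (List Bool) × List (Int × Int)) : List (List Bool) × List (Int × Int) :=
  pvExpand (pvCondFloodB land n m) (fun b x y => pvSet2 b x y true) st.1 st.2

def pvCondPersonB (land : List (List String)) (n m : Int) (fl : List (List Bool))
    (vis : List (List Bool)) (x y : Int) : Bool :=
  pvValid n m x y && !(pvGet2 vis x y false) && decide (pvCell land x y ≠ "X") &&
    !(pvGet2 fl x y false)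

-- lockstep loop: each second the flood layer advances first, then the person layer
def pvLockstep (land : List (List String)) (n m dx dy : Int) :
    Nat → List (List Bool) × List (Int × Int) → List (List Bool) → List (Int × Int) → Int → Int
  | 0, _, _, _, _ => -1
  | fuel + 1, fl, vis, front, t =>
      if front = [] then -1
      else if front.contains (dx, dy) then t
      else
        let fl' := pvFloodStepB land n m fl
        let e := pvExpand (pvCondPersonB land n m fl'.1) (fun v x y => pvSet2 v x y true) vis front
        pvLockstep land n m dx dy fuel fl' e.1 e.2 (t + 1)

def minimumSeconds_alt (land : List (List String)) : Int :=
  let n : Int := land.length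
  let m : Int := (land.headD []).length
  let sd := pvFindSD land n m
  let b0 := (PySem.List.pyRange 0 n 1).map (fun i =>
      (PySem.List.pyRange 0 m 1).map (fun j => decide (pvCell land i j = "*")))
  let f0 := (PySem.List.pyRange 0 n 1).flatMap (fun i =>
      ((PySem.List.pyRange 0 m 1).filter (fun j => pvCell land i j = "*")).map (fun j => (i, j)))
  let vis0 := pvSet2 (List.replicate land.length (List.replicate (land.headD []).length false))
    sd.1 sd.2.1 true
  pvLockstep land n m sd.2.2.1 sd.2.2.2 (pvFuel land) (b0, f0) vis0 [(sd.1, sd.2.1)] 0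

-- ===== PRECONDITION & SPEC =====

-- Pre_ excludes exactly the inputs on which the Python A raises IndexError: the empty grid,
-- zero-width grids (visited[-1][-1] on empty rows) and grids with a row shorter than row 0.
def Pre_minimumSeconds (land : List (List String)) : Prop :=
  land ≠ [] ∧ 0 < (land.headD []).length ∧ ∀ row ∈ land, (land.headD []).length ≤ row.length

instance (land : List (List String)) : Decidable (Pre_minimumSeconds land) := by
  unfold Pre_minimumSeconds; infer_instance

def pvWitness_minimumSeconds : List (List String) :=
  [["S", ".", "*"], [".", "X", "."], ["*", ".", "D"]]

def Spec_minimumSeconds (land : List (List String)) (out : Int) : Prop := out = minimumSeconds_alt land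
instance (land : List (List String)) (out : Int) : Decidable (Spec_minimumSeconds land out) := by
  unfold Spec_minimumSeconds; infer_instance

-- ===== CLAIM (what is proved, stated in full; the proofs are below) =====
def Claim_equal_minimumSeconds : Prop := ∀ (land : List (List String)), Dom_minimumSeconds land → Pre_minimumSeconds land → Spec_minimumSeconds land (minimumSeconds land)

-- ===== LEMMAS AND PROOFS =====

-- ---------- Part 1: low-level grid lemmas ----------

def pvShape {α : Type} (g : List (List α)) (n m : Int) : Prop :=
  (g.length : Int) = n ∧ ∀ (k : Nat), k < g.length → (((g[k]?.getD []).length : Int)) = m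

def pvCount {α : Type} (P : α → Bool) (g : List (List α)) : Nat :=
  (g.map (fun r => r.countP P)).sum

theorem pvLset_nonneg {α : Type} (l : List α) {j : Int} (a : α) (hj : 0 ≤ j) :
    pvLset l j a = l.set j.toNat a := by
  have hx : (if j < 0 then j + (l.length : Int) else j) = j := if_neg (by omega)
  unfold pvLset; dsimp only; rw [hx, if_pos hj]

theorem pvLset_length {α : Type} (l : List α) (i : Int) (a : α) :
    (pvLset l i a).length = l.length := by
  unfold pvLset; dsimp only
  split <;> split <;> first | rfl | simp

theorem pvSet2_nonneg {α : Type} (g : List (List α)) {i : Int} (j : Int) (a : α) (hi : 0 ≤ i) :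
    pvSet2 g i j a = g.set i.toNat (pvLset (g[i.toNat]?.getD []) j a) := by
  have hx : (if i < 0 then i + (g.length : Int) else i) = i := if_neg (by omega)
  unfold pvSet2; dsimp only; rw [hx, if_pos hi]

theorem pvSet2_eq_set {α : Type} (g : List (List α)) (i j : Int) (a : α) :
    pvSet2 g i j a = g ∨
      ∃ r : Nat, r < g.length ∧ pvSet2 g i j a = g.set r (pvLset (g[r]?.getD []) j a) := by
  unfold pvSet2; dsimp only
  by_cases h0 : 0 ≤ (if i < 0 then i + (g.length : Int) else i)
  · rw [if_pos h0]
    by_cases hlt : (if i < 0 then i + (g.length : Int) else i).toNat < g.length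
    · right; exact ⟨_, hlt, rfl⟩
    · left; rw [List.set_eq_of_length_le (by omega)]
  · rw [if_neg h0]; left; rfl

theorem pvShape_pvSet2 {α : Type} {g : List (List α)} {n m : Int} (i j : Int) (a : α)
    (hs : pvShape g n m) : pvShape (pvSet2 g i j a) n m := by
  obtain ⟨h1, h2⟩ := hs
  rcases pvSet2_eq_set g i j a with h | ⟨r, hr, h⟩ <;> rw [h]
  · exact ⟨h1, h2⟩
  · refine ⟨by simpa using h1, ?_⟩
    intro k hk
    rw [List.length_set] at hk
    rw [List.getElem?_set]
    by_cases hrk : r = k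
    · rw [if_pos hrk, if_pos (by omega)]
      simp only [Option.getD_some]
      rw [pvLset_length]
      exact h2 _ (by omega)
    · rw [if_neg hrk]
      exact h2 _ hk

theorem pvGet2_eq {α : Type} (g : List (List α)) (i j : Int) (d : α)
    (hi0 : 0 ≤ i) (hj0 : 0 ≤ j) (hi : i.toNat < g.length)
    (hj : j.toNat < (g[i.toNat]'hi).length) :
    pvGet2 g i j d = (g[i.toNat]'hi)[j.toNat]'hj := by
  unfold pvGet2
  rw [if_pos ⟨hi0, hj0⟩, List.getElem?_eq_getElem hi]
  simp only [Option.getD_some]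
  rw [List.getElem?_eq_getElem hj]
  rfl

theorem pvShape_index {α : Type} {g : List (List α)} {n m : Int} (hs : pvShape g n m)
    {i j : Int} (h : 0 ≤ i ∧ i < n ∧ 0 ≤ j ∧ j < m) :
    ∃ (hi : i.toNat < g.length), j.toNat < (g[i.toNat]'hi).length := by
  obtain ⟨h1, h2⟩ := hs
  have hi : i.toNat < g.length := by omega
  have := h2 i.toNat hi
  rw [List.getElem?_eq_getElem hi] at this
  simp only [Option.getD_some] at this
  exact ⟨hi, by omega⟩

theorem pvGet2_pvSet2_self {α : Type} {g : List (List α)} {n m : Int} {i j : Int} (a : α) (d : α)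
    (hs : pvShape g n m) (h : 0 ≤ i ∧ i < n ∧ 0 ≤ j ∧ j < m) :
    pvGet2 (pvSet2 g i j a) i j d = a := by
  obtain ⟨hi, hj⟩ := pvShape_index hs h
  rw [pvSet2_nonneg g j a (by omega)]
  have hrow : g[i.toNat]?.getD [] = g[i.toNat]'hi := by
    rw [List.getElem?_eq_getElem hi]; rfl
  rw [pvLset_nonneg _ a (by omega), hrow]
  unfold pvGet2
  rw [if_pos ⟨by omega, by omega⟩]
  rw [List.getElem?_set, if_pos rfl, if_pos (by simpa using hi)]
  simp only [Option.getD_some]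
  rw [List.getElem?_set, if_pos rfl, if_pos (by simpa using hj)]
  rfl

theorem pvGet2_pvSet2_ne {α : Type} (g : List (List α)) {i j : Int} (x y : Int) (a : α) (d : α)
    (hi : 0 ≤ i) (hj : 0 ≤ j) (hne : ¬ (x = i ∧ y = j)) :
    pvGet2 (pvSet2 g i j a) x y d = pvGet2 g x y d := by
  rw [pvSet2_nonneg g j a hi, pvLset_nonneg _ a hj]
  unfold pvGet2
  by_cases hxy : 0 ≤ x ∧ 0 ≤ y
  · rw [if_pos hxy, if_pos hxy]
    rw [List.getElem?_set]
    by_cases hx : i.toNat = x.toNat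
    · have hxi : x = i := by omega
      have hyj : y ≠ j := fun hc => hne ⟨hxi, hc⟩
      rw [if_pos hx]
      split
      · simp only [Option.getD_some]
        rw [List.getElem?_set, if_neg (by omega : ¬ j.toNat = y.toNat), hxi]
      · rename_i hlen
        rw [hxi, List.getElem?_eq_none (by omega : g.length ≤ i.toNat)]
    · rw [if_neg hx]
  · rw [if_neg hxy, if_neg hxy]

theorem pvCount_set {α : Type} (P : α → Bool) (g : List (List α)) (r : Nat) (row' : List α)
    (hr : r < g.length) :
    pvCount P (g.set r row') + (g[r]'hr).countP P = pvCount P g + row'.countP P := by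
  unfold pvCount
  rw [List.map_set, List.sum_set, if_pos (by simpa using hr)]
  have hrm : r < (List.map (fun r => List.countP P r) g).length := by simpa using hr
  have hdecomp := List.sum_take_add_sum_drop (List.map (fun r => List.countP P r) g) r
  have hdrop := List.drop_eq_getElem_cons hrm
  rw [hdrop] at hdecomp
  rw [List.sum_cons] at hdecomp
  have hget : (List.map (fun r => List.countP P r) g)[r]'hrm = List.countP P (g[r]'hr) := by
    simp
  rw [hget] at hdecomp
  omega

theorem pvCount_pvSet2_lt {α : Type} (P : α → Bool) {g : List (List α)} {n m : Int} {i j : Int}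
    (a : α) (d : α) (hs : pvShape g n m) (h : 0 ≤ i ∧ i < n ∧ 0 ≤ j ∧ j < m)
    (hP : P (pvGet2 g i j d) = true) (hPa : P a = false) :
    pvCount P (pvSet2 g i j a) < pvCount P g := by
  obtain ⟨hi, hj⟩ := pvShape_index hs h
  have hrow : g[i.toNat]?.getD [] = g[i.toNat]'hi := by rw [List.getElem?_eq_getElem hi]; rfl
  rw [pvSet2_nonneg g j a (by omega), pvLset_nonneg _ a (by omega), hrow]
  have hgv : pvGet2 g i j d = (g[i.toNat]'hi)[j.toNat]'hj := pvGet2_eq g i j d (by omega) (by omega) hi hj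
  have hlt : ((g[i.toNat]'hi).set j.toNat a).countP P < (g[i.toNat]'hi).countP P := by
    rw [List.countP_set hj, hPa]
    rw [← hgv, hP]
    simp only [Bool.false_eq_true, if_false, eq_self_iff_true, if_true]
    have hone : 1 ≤ (g[i.toNat]'hi).countP P := by
      rw [Nat.succ_le_iff, List.countP_pos_iff]
      exact ⟨_, List.getElem_mem hj, by rw [← hgv]; exact hP⟩
    omega
  have := pvCount_set P g i.toNat ((g[i.toNat]'hi).set j.toNat a) hi
  omega

theorem pvCount_le_size {α : Type} (P : α → Bool) {g : List (List α)} {n m : Int}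
    (hs : pvShape g n m) : pvCount P g ≤ g.length * m.toNat := by
  obtain ⟨h1, h2⟩ := hs
  clear h1
  unfold pvCount
  induction g with
  | nil => simp
  | cons r t ih =>
    simp only [List.map_cons, List.sum_cons, List.length_cons]
    have hr : List.countP P r ≤ m.toNat := by
      have := h2 0 (by simp)
      simp only [List.getElem?_cons_zero, Option.getD_some] at this
      calc List.countP P r ≤ r.length := List.countP_le_length ..
        _ = m.toNat := by omega
    have ht : (List.map (fun r => List.countP P r) t).sum ≤ t.length * m.toNat := by
      apply ih
      intro k hk
      have := h2 (k+1) (by simpa using Nat.succ_lt_succ hk)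
      simpa using this
    calc List.countP P r + (List.map (fun r => List.countP P r) t).sum
        ≤ m.toNat + t.length * m.toNat := by omega
      _ = (t.length + 1) * m.toNat := by ring

-- ---------- Part 2: generic frontier-expansion lemmas ----------

theorem pvFoldAcc {σ γ β : Type} (f : (σ × List γ) → β → (σ × List γ))
    (hf : ∀ s out z, f (s, out) z = ((f (s, []) z).1, out ++ (f (s, []) z).2)) :
    ∀ (L : List β) (s : σ) (out : List γ),
      L.foldl f (s, out) = ((L.foldl f (s, [])).1, out ++ (L.foldl f (s, [])).2) := by
  intro L
  induction L with
  | nil => intro s out; simp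
  | cons z t ih =>
    intro s out
    simp only [List.foldl_cons]
    rw [hf s out z]
    rw [ih (f (s, []) z).1 (out ++ (f (s, []) z).2), ih (f (s, []) z).1 (f (s, []) z).2]
    simp

theorem pvStep_acc {σ : Type} (C : σ → Int → Int → Bool) (U : σ → Int → Int → σ)
    (x y : Int) (s : σ) (out : List (Int × Int)) :
    pvStep C U x y (s, out) =
      ((pvStep C U x y (s, [])).1, out ++ (pvStep C U x y (s, [])).2) := by
  unfold pvStep
  apply pvFoldAcc
  intro s out z
  dsimp only
  split <;> simp

theorem pvExpand_nil {σ : Type} (C : σ → Int → Int → Bool) (U : σ → Int → Int → σ) (s : σ) :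
    pvExpand C U s [] = (s, []) := rfl

theorem pvExpand_cons {σ : Type} (C : σ → Int → Int → Bool) (U : σ → Int → Int → σ)
    (s : σ) (p : Int × Int) (F : List (Int × Int)) :
    pvExpand C U s (p :: F) =
      ((pvExpand C U (pvStep C U p.1 p.2 (s, [])).1 F).1,
        (pvStep C U p.1 p.2 (s, [])).2 ++ (pvExpand C U (pvStep C U p.1 p.2 (s, [])).1 F).2) := by
  unfold pvExpand
  rw [List.foldl_cons]
  have hacc : ∀ (s : σ) (out : List (Int × Int)) (z : Int × Int),
      pvStep C U z.1 z.2 (s, out) =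
        ((pvStep C U z.1 z.2 (s, [])).1, out ++ (pvStep C U z.1 z.2 (s, [])).2) := by
    intro s out z; exact pvStep_acc C U z.1 z.2 s out
  rw [pvStep_acc C U p.1 p.2 s []]
  simp only [List.nil_append]
  exact pvFoldAcc _ hacc F _ _

theorem pvStep_inv {σ : Type} (C : σ → Int → Int → Bool) (U : σ → Int → Int → σ)
    (Inv : σ → Prop) (μ : σ → Nat)
    (Hpush : ∀ s x y, Inv s → C s x y = true → Inv (U s x y) ∧ μ (U s x y) < μ s) :
    ∀ (x y : Int) (s : σ) (out : List (Int × Int)), Inv s →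
      Inv (pvStep C U x y (s, out)).1 ∧
        μ (pvStep C U x y (s, out)).1 + (pvStep C U x y (s, out)).2.length ≤ μ s + out.length := by
  intro x y
  unfold pvStep
  generalize pvDirs = L
  induction L with
  | nil => intro s out h; exact ⟨h, le_refl _⟩
  | cons d t ih =>
    intro s out h
    simp only [List.foldl_cons]
    by_cases hc : C s (x + d.1) (y + d.2) = true
    · rw [if_pos hc]
      obtain ⟨h1, h2⟩ := Hpush s (x + d.1) (y + d.2) h hc
      have := ih (U s (x + d.1) (y + d.2)) (out ++ [(x + d.1, y + d.2)]) h1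
      refine ⟨this.1, le_trans this.2 ?_⟩
      simp only [List.length_append, List.length_cons, List.length_nil]
      omega
    · rw [if_neg hc]
      exact ih s out h

theorem pvExpand_inv {σ : Type} (C : σ → Int → Int → Bool) (U : σ → Int → Int → σ)
    (Inv : σ → Prop) (μ : σ → Nat)
    (Hpush : ∀ s x y, Inv s → C s x y = true → Inv (U s x y) ∧ μ (U s x y) < μ s) :
    ∀ (F : List (Int × Int)) (s : σ), Inv s →
      Inv (pvExpand C U s F).1 ∧
        μ (pvExpand C U s F).1 + (pvExpand C U s F).2.length ≤ μ s := by
  have main : ∀ (F : List (Int × Int)) (s : σ) (out : List (Int × Int)), Inv s →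
      Inv (F.foldl (fun a p => pvStep C U p.1 p.2 a) (s, out)).1 ∧
        μ (F.foldl (fun a p => pvStep C U p.1 p.2 a) (s, out)).1 +
          (F.foldl (fun a p => pvStep C U p.1 p.2 a) (s, out)).2.length ≤ μ s + out.length := by
    intro F
    induction F with
    | nil => intro s out h; exact ⟨h, le_refl _⟩
    | cons p t ih =>
      intro s out h
      simp only [List.foldl_cons]
      obtain ⟨h1, h2⟩ := pvStep_inv C U Inv μ Hpush p.1 p.2 s out h
      rcases hsp : pvStep C U p.1 p.2 (s, out) with ⟨s1, o1⟩
      rw [hsp] at h1 h2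
      simp only at h1 h2
      obtain ⟨h3, h4⟩ := ih s1 o1 h1
      exact ⟨h3, by omega⟩
  intro F s h
  exact main F s [] h

theorem pvStep_rel {σ₁ σ₂ : Type} (C₁ : σ₁ → Int → Int → Bool) (U₁ : σ₁ → Int → Int → σ₁)
    (C₂ : σ₂ → Int → Int → Bool) (U₂ : σ₂ → Int → Int → σ₂) (R : σ₁ → σ₂ → Prop)
    (HC : ∀ s₁ s₂ x y, R s₁ s₂ → C₁ s₁ x y = C₂ s₂ x y)
    (HU : ∀ s₁ s₂ x y, R s₁ s₂ → C₁ s₁ x y = true → R (U₁ s₁ x y) (U₂ s₂ x y)) :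
    ∀ (x y : Int) (s₁ : σ₁) (s₂ : σ₂) (out : List (Int × Int)), R s₁ s₂ →
      R (pvStep C₁ U₁ x y (s₁, out)).1 (pvStep C₂ U₂ x y (s₂, out)).1 ∧
        (pvStep C₁ U₁ x y (s₁, out)).2 = (pvStep C₂ U₂ x y (s₂, out)).2 := by
  intro x y
  unfold pvStep
  generalize pvDirs = L
  induction L with
  | nil => intro s₁ s₂ out h; exact ⟨h, rfl⟩
  | cons d t ih =>
    intro s₁ s₂ out h
    simp only [List.foldl_cons]
    rw [← HC s₁ s₂ (x + d.1) (y + d.2) h]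
    by_cases hc : C₁ s₁ (x + d.1) (y + d.2) = true
    · rw [if_pos hc, if_pos hc]
      exact ih _ _ _ (HU s₁ s₂ (x + d.1) (y + d.2) h hc)
    · rw [if_neg hc, if_neg hc]
      exact ih _ _ _ h

theorem pvExpand_rel {σ₁ σ₂ : Type} (C₁ : σ₁ → Int → Int → Bool) (U₁ : σ₁ → Int → Int → σ₁)
    (C₂ : σ₂ → Int → Int → Bool) (U₂ : σ₂ → Int → Int → σ₂) (R : σ₁ → σ₂ → Prop)
    (HC : ∀ s₁ s₂ x y, R s₁ s₂ → C₁ s₁ x y = C₂ s₂ x y)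
    (HU : ∀ s₁ s₂ x y, R s₁ s₂ → C₁ s₁ x y = true → R (U₁ s₁ x y) (U₂ s₂ x y)) :
    ∀ (F : List (Int × Int)) (s₁ : σ₁) (s₂ : σ₂), R s₁ s₂ →
      R (pvExpand C₁ U₁ s₁ F).1 (pvExpand C₂ U₂ s₂ F).1 ∧
        (pvExpand C₁ U₁ s₁ F).2 = (pvExpand C₂ U₂ s₂ F).2 := by
  have main : ∀ (F : List (Int × Int)) (s₁ : σ₁) (s₂ : σ₂) (out : List (Int × Int)), R s₁ s₂ →
      R (F.foldl (fun a p => pvStep C₁ U₁ p.1 p.2 a) (s₁, out)).1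
          (F.foldl (fun a p => pvStep C₂ U₂ p.1 p.2 a) (s₂, out)).1 ∧
        (F.foldl (fun a p => pvStep C₁ U₁ p.1 p.2 a) (s₁, out)).2 =
          (F.foldl (fun a p => pvStep C₂ U₂ p.1 p.2 a) (s₂, out)).2 := by
    intro F
    induction F with
    | nil => intro s₁ s₂ out h; exact ⟨h, rfl⟩
    | cons p t ih =>
      intro s₁ s₂ out h
      simp only [List.foldl_cons]
      obtain ⟨h1, h2⟩ := pvStep_rel C₁ U₁ C₂ U₂ R HC HU p.1 p.2 s₁ s₂ out h
      rcases hs1 : pvStep C₁ U₁ p.1 p.2 (s₁, out) with ⟨a1, b1⟩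
      rcases hs2 : pvStep C₂ U₂ p.1 p.2 (s₂, out) with ⟨a2, b2⟩
      rw [hs1, hs2] at h1 h2
      simp only at h1 h2
      subst h2
      exact ih a1 a2 b1 h1
  intro F s₁ s₂ h
  exact main F s₁ s₂ [] h

-- ---------- Part 3: level-synchronous reference machinery ----------

def pvStage {σ : Type} (Ct : Int → σ → Int → Int → Bool) (Ut : Int → σ → Int → Int → σ)
    (st : σ × List (Int × Int) × Int) : σ × List (Int × Int) × Int :=
  let e := pvExpand (Ct st.2.2) (Ut st.2.2) st.1 st.2.1
  (e.1, e.2, st.2.2 + 1)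

def pvStages {σ : Type} (Ct : Int → σ → Int → Int → Bool) (Ut : Int → σ → Int → Int → σ)
    (k : Nat) (st : σ × List (Int × Int) × Int) : σ × List (Int × Int) × Int :=
  (pvStage Ct Ut)^[k] st

def pvPlans {σ : Type} (Ct : Int → σ → Int → Int → Bool) (Ut : Int → σ → Int → Int → σ)
    (P : Int × Int → Bool) : Nat → σ → List (Int × Int) → Int → Option Int
  | 0, _, _, _ => none
  | fuel + 1, s, F, t =>
      if F = [] then none
      else if F.any P then some t
      else
        let e := pvExpand (Ct t) (Ut t) s F
        pvPlans Ct Ut P fuel e.1 e.2 (t + 1)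

theorem pvStages_nil {σ : Type} (Ct : Int → σ → Int → Int → Bool) (Ut : Int → σ → Int → Int → σ)
    (k : Nat) (s : σ) (t : Int) : pvStages Ct Ut k (s, [], t) = (s, [], t + k) := by
  induction k generalizing t with
  | zero => simp [pvStages]
  | succ k ih =>
    unfold pvStages
    rw [Function.iterate_succ_apply]
    have h1 : pvStage Ct Ut (s, [], t) = (s, [], t + 1) := by
      unfold pvStage
      rw [pvExpand_nil]
    rw [h1]
    have := ih (t + 1)
    unfold pvStages at this
    rw [this]
    congr 2
    omega

theorem pvStages_grid_stable {σ : Type} (Ct : Int → σ → Int → Int → Bool)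
    (Ut : Int → σ → Int → Int → σ) (InvT : Int → σ → Prop) (μ : σ → Nat)
    (Hpush : ∀ t s x y, InvT t s → Ct t s x y = true →
      InvT t (Ut t s x y) ∧ μ (Ut t s x y) < μ s)
    (Hweak : ∀ t s, InvT t s → InvT (t + 1) s) :
    ∀ (l l' : Nat) (s : σ) (F : List (Int × Int)) (t : Int), InvT t s →
      μ s + 1 ≤ l → μ s + 1 ≤ l' →
      (pvStages Ct Ut l (s, F, t)).1 = (pvStages Ct Ut l' (s, F, t)).1 := by
  intro l
  induction l using Nat.strong_induction_on with
  | _ l IH =>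
    intro l' s F t hInv hl hl'
    rcases F with _ | ⟨p, F'⟩
    · rw [pvStages_nil, pvStages_nil]
    · obtain ⟨a, rfl⟩ : ∃ a, l = a + 1 := ⟨l - 1, by omega⟩
      obtain ⟨b, rfl⟩ : ∃ b, l' = b + 1 := ⟨l' - 1, by omega⟩
      unfold pvStages
      rw [Function.iterate_succ_apply, Function.iterate_succ_apply]
      have hst : pvStage Ct Ut (s, p :: F', t) =
          ((pvExpand (Ct t) (Ut t) s (p :: F')).1, (pvExpand (Ct t) (Ut t) s (p :: F')).2, t + 1) := rfl
      rw [hst]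
      obtain ⟨hI, hμ⟩ := pvExpand_inv (Ct t) (Ut t) (InvT t) μ (fun s x y => Hpush t s x y)
        (p :: F') s hInv
      have hI' : InvT (t + 1) (pvExpand (Ct t) (Ut t) s (p :: F')).1 := Hweak t _ hI
      rcases he : (pvExpand (Ct t) (Ut t) s (p :: F')).2 with _ | ⟨q, Q⟩
      · have h1 := pvStages_nil Ct Ut a (pvExpand (Ct t) (Ut t) s (p :: F')).1 (t + 1)
        have h2 := pvStages_nil Ct Ut b (pvExpand (Ct t) (Ut t) s (p :: F')).1 (t + 1)
        unfold pvStages at h1 h2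
        rw [h1, h2]
      · rw [he] at hμ
        simp only [List.length_cons] at hμ
        have := IH a (by omega) b (pvExpand (Ct t) (Ut t) s (p :: F')).1 (q :: Q) (t + 1)
          hI' (by omega) (by omega)
        unfold pvStages at this
        exact this

theorem pvPlans_stable {σ : Type} (Ct : Int → σ → Int → Int → Bool)
    (Ut : Int → σ → Int → Int → σ) (P : Int × Int → Bool) (InvT : Int → σ → Prop) (μ : σ → Nat)
    (Hpush : ∀ t s x y, InvT t s → Ct t s x y = true →
      InvT t (Ut t s x y) ∧ μ (Ut t s x y) < μ s)
    (Hweak : ∀ t s, InvT t s → InvT (t + 1) s) :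
    ∀ (l l' : Nat) (s : σ) (F : List (Int × Int)) (t : Int), InvT t s →
      μ s + 2 ≤ l → μ s + 2 ≤ l' →
      pvPlans Ct Ut P l s F t = pvPlans Ct Ut P l' s F t := by
  intro l
  induction l using Nat.strong_induction_on with
  | _ l IH =>
    intro l' s F t hInv hl hl'
    obtain ⟨a, rfl⟩ : ∃ a, l = a + 1 := ⟨l - 1, by omega⟩
    obtain ⟨b, rfl⟩ : ∃ b, l' = b + 1 := ⟨l' - 1, by omega⟩
    unfold pvPlans
    rcases F with _ | ⟨p, F'⟩
    · simp
    · have hnil : ¬ (p :: F' = []) := by simp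
      by_cases hP : (p :: F').any P = true
      · rw [if_neg hnil, if_neg hnil, if_pos hP, if_pos hP]
      · rw [if_neg hnil, if_neg hnil, if_neg hP, if_neg hP]
        dsimp only
        obtain ⟨hI, hμ⟩ := pvExpand_inv (Ct t) (Ut t) (InvT t) μ (fun s x y => Hpush t s x y)
          (p :: F') s hInv
        have hI' : InvT (t + 1) (pvExpand (Ct t) (Ut t) s (p :: F')).1 := Hweak t _ hI
        rcases he : (pvExpand (Ct t) (Ut t) s (p :: F')).2 with _ | ⟨q, Q⟩
        · obtain ⟨a', rfl⟩ : ∃ a', a = a' + 1 := ⟨a - 1, by omega⟩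
          obtain ⟨b', rfl⟩ : ∃ b', b = b' + 1 := ⟨b - 1, by omega⟩
          unfold pvPlans
          simp
        · rw [he] at hμ
          simp only [List.length_cons] at hμ
          exact IH a (by omega) b (pvExpand (Ct t) (Ut t) s (p :: F')).1 (q :: Q) (t + 1)
            hI' (by omega) (by omega)

-- ---------- Part 4: instances and the queue-to-level lemmas ----------

def pvPnone : Option Int → Bool := fun o => decide (o = none)
def pvPfalse : Bool → Bool := fun b => decide (b = false)
def pvTag (t : Int) (F : List (Int × Int)) : List (Int × Int × Int) :=
  F.map (fun p => (p.1, p.2, t))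
def pvUflood : Int → List (List (Option Int)) → Int → Int → List (List (Option Int)) :=
  fun t g x y => pvSet2 g x y (some (t + 1))
def pvUmark : Int → List (List Bool) → Int → Int → List (List Bool) :=
  fun _ v x y => pvSet2 v x y true
def pvInvN (n m : Int) (t : Int) (g : List (List (Option Int))) : Prop :=
  0 ≤ t ∧ pvShape g n m ∧ ∀ x y v, pvGet2 g x y none = some v → 0 ≤ v ∧ v ≤ t + 1
def pvPdest (dx dy : Int) : Int × Int → Bool := fun p => decide (p.1 = dx ∧ p.2 = dy)

theorem pvTag_cons (t : Int) (p : Int × Int) (F : List (Int × Int)) :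
    pvTag t (p :: F) = (p.1, p.2, t) :: pvTag t F := rfl

theorem pvTag_append (t : Int) (F G : List (Int × Int)) :
    pvTag t (F ++ G) = pvTag t F ++ pvTag t G := List.map_append ..

theorem pvStep_len {σ : Type} (C : σ → Int → Int → Bool) (U : σ → Int → Int → σ)
    (x y : Int) (s : σ) :
    (pvStep C U x y (s, [])).2.length ≤ 4 := by
  unfold pvStep
  have main : ∀ (L : List (Int × Int)) (s : σ) (out : List (Int × Int)),
      (L.foldl (fun a d =>
        if C a.1 (x + d.1) (y + d.2) = true then (U a.1 (x + d.1) (y + d.2), a.2 ++ [(x + d.1, y + d.2)]) else a)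
        (s, out)).2.length ≤ out.length + L.length := by
    intro L
    induction L with
    | nil => intro s out; simp
    | cons d tl ih =>
      intro s out
      simp only [List.foldl_cons]
      by_cases hc : C s (x + d.1) (y + d.2) = true
      · rw [if_pos hc]
        have := ih (U s (x + d.1) (y + d.2)) (out ++ [(x + d.1, y + d.2)])
        simp only [List.length_append, List.length_cons, List.length_nil] at this
        simp only [List.length_cons]
        omega
      · rw [if_neg hc]
        have := ih s out
        simp only [List.length_cons]
        omega
  have h4 : pvDirs.length = 4 := rfl
  calc (pvDirs.foldl _ (s, [])).2.length ≤ [].length + pvDirs.length := main pvDirs s []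
    _ = 4 := by rw [h4]; rfl

theorem pvValid_iff (n m x y : Int) :
    pvValid n m x y = true ↔ (0 ≤ x ∧ x < n ∧ 0 ≤ y ∧ y < m) := by
  unfold pvValid; rw [decide_eq_true_iff]

theorem pvHpushN (land : List (List String)) (n m : Int) :
    ∀ (t : Int) (g : List (List (Option Int))) (x y : Int),
      pvInvN n m t g → pvCondFloodA land n m t g x y = true →
      pvInvN n m t (pvUflood t g x y) ∧
        pvCount pvPnone (pvUflood t g x y) < pvCount pvPnone g := by
  intro t g x y hInv hc
  unfold pvUflood
  obtain ⟨ht, hsh, hval⟩ := hInv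
  unfold pvCondFloodA at hc
  rw [Bool.and_eq_true, Bool.and_eq_true] at hc
  obtain ⟨⟨hv, _⟩, hgt⟩ := hc
  rw [pvValid_iff] at hv
  have hnone : pvGet2 g x y none = none := by
    cases hg : pvGet2 g x y none with
    | none => rfl
    | some w =>
      obtain ⟨hw0, hwle⟩ := hval x y w hg
      unfold pvInfGt at hgt
      rw [hg] at hgt
      rw [decide_eq_true_iff] at hgt
      omega
  refine ⟨⟨ht, pvShape_pvSet2 x y _ hsh, ?_⟩, ?_⟩
  · intro x' y' v hv'
    by_cases hxy : x' = x ∧ y' = y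
    · obtain ⟨rfl, rfl⟩ := hxy
      rw [pvGet2_pvSet2_self _ none hsh hv] at hv'
      cases hv'
      omega
    · rw [pvGet2_pvSet2_ne g x' y' _ none (by omega) (by omega) hxy] at hv'
      exact hval x' y' v hv'
  · exact pvCount_pvSet2_lt pvPnone _ none hsh hv (by rw [hnone]; rfl) (by rfl)

theorem pvHpushMark (n m : Int) (C : Int → List (List Bool) → Int → Int → Bool)
    (hC : ∀ t vis x y, C t vis x y = true →
      (0 ≤ x ∧ x < n ∧ 0 ≤ y ∧ y < m) ∧ pvGet2 vis x y false = false) :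
    ∀ (t : Int) (vis : List (List Bool)) (x y : Int),
      (fun (_ : Int) vis => pvShape vis n m) t vis → C t vis x y = true →
      (fun (_ : Int) vis => pvShape vis n m) t (pvUmark t vis x y) ∧
        pvCount pvPfalse (pvUmark t vis x y) < pvCount pvPfalse vis := by
  intro t vis x y hsh hc
  unfold pvUmark
  obtain ⟨hv, hfalse⟩ := hC t vis x y hc
  refine ⟨pvShape_pvSet2 x y _ hsh, ?_⟩
  exact pvCount_pvSet2_lt pvPfalse _ false hsh hv (by rw [hfalse]; rfl) (by rfl)

theorem pvCondPersonA_parts (land : List (List String)) (n m t : Int)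
    (gInf : List (List (Option Int))) (vis : List (List Bool)) (x y : Int)
    (hc : pvCondPersonA land n m t gInf vis x y = true) :
    (0 ≤ x ∧ x < n ∧ 0 ≤ y ∧ y < m) ∧ pvGet2 vis x y false = false := by
  unfold pvCondPersonA at hc
  rw [Bool.and_eq_true, Bool.and_eq_true, Bool.and_eq_true] at hc
  obtain ⟨⟨⟨hv, hnv⟩, _⟩, _⟩ := hc
  rw [pvValid_iff] at hv
  refine ⟨hv, ?_⟩
  rw [Bool.not_eq_true'] at hnv
  exact hnv

theorem pvCondPersonB_parts (land : List (List String)) (n m : Int)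
    (fl : List (List Bool)) (vis : List (List Bool)) (x y : Int)
    (hc : pvCondPersonB land n m fl vis x y = true) :
    (0 ≤ x ∧ x < n ∧ 0 ≤ y ∧ y < m) ∧ pvGet2 vis x y false = false := by
  unfold pvCondPersonB at hc
  rw [Bool.and_eq_true, Bool.and_eq_true, Bool.and_eq_true] at hc
  obtain ⟨⟨⟨hv, hnv⟩, _⟩, _⟩ := hc
  rw [pvValid_iff] at hv
  refine ⟨hv, ?_⟩
  rw [Bool.not_eq_true'] at hnv
  exact hnv

theorem pvInvN_weak (n m t : Int) (g : List (List (Option Int))) (h : pvInvN n m t g) :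
    pvInvN n m (t + 1) g := by
  obtain ⟨h1, h2, h3⟩ := h
  exact ⟨by omega, h2, fun x y v hv => by obtain ⟨a, b⟩ := h3 x y v hv; exact ⟨a, by omega⟩⟩

theorem pvStages_succ {σ : Type} (Ct : Int → σ → Int → Int → Bool)
    (Ut : Int → σ → Int → Int → σ) (k : Nat) (st : σ × List (Int × Int) × Int) :
    pvStages Ct Ut (k + 1) st = pvStages Ct Ut k (pvStage Ct Ut st) :=
  Function.iterate_succ_apply _ _ _

theorem pvStage_def {σ : Type} (Ct : Int → σ → Int → Int → Bool)
    (Ut : Int → σ → Int → Int → σ) (s : σ) (F : List (Int × Int)) (t : Int) :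
    pvStage Ct Ut (s, F, t) =
      ((pvExpand (Ct t) (Ut t) s F).1, (pvExpand (Ct t) (Ut t) s F).2, t + 1) := rfl

theorem pvPlans_nil {σ : Type} (Ct : Int → σ → Int → Int → Bool)
    (Ut : Int → σ → Int → Int → σ) (P : Int × Int → Bool) (l : Nat) (hl : 1 ≤ l) (s : σ) (t : Int) :
    pvPlans Ct Ut P l s [] t = none := by
  obtain ⟨l', rfl⟩ : ∃ l', l = l' + 1 := ⟨l - 1, by omega⟩
  simp [pvPlans]

theorem pvPlans_pos {σ : Type} (Ct : Int → σ → Int → Int → Bool)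
    (Ut : Int → σ → Int → Int → σ) (P : Int × Int → Bool) (l : Nat) (hl : 1 ≤ l) (s : σ)
    (F : List (Int × Int)) (t : Int) :
    pvPlans Ct Ut P l s F t =
      if F = [] then none
      else if F.any P then some t
      else pvPlans Ct Ut P (l - 1) (pvExpand (Ct t) (Ut t) s F).1
        (pvExpand (Ct t) (Ut t) s F).2 (t + 1) := by
  obtain ⟨l', rfl⟩ : ∃ l', l = l' + 1 := ⟨l - 1, by omega⟩
  simp only [pvPlans, Nat.add_sub_cancel]

theorem pvFloodLoopA_nil (land : List (List String)) (n m : Int) (f : Nat)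
    (g : List (List (Option Int))) : pvFloodLoopA land n m (f + 1) g [] = g := rfl

theorem pvFloodLoopA_cons (land : List (List String)) (n m : Int) (f : Nat)
    (g : List (List (Option Int))) (x y t : Int) (q : List (Int × Int × Int)) :
    pvFloodLoopA land n m (f + 1) g ((x, y, t) :: q) =
      pvFloodLoopA land n m f (pvStep (pvCondFloodA land n m t) (pvUflood t) x y (g, [])).1
        (q ++ (pvStep (pvCondFloodA land n m t) (pvUflood t) x y (g, [])).2.map
          (fun p => (p.1, p.2, t + 1))) := rfl

theorem pvPersonLoopA_nil (land : List (List String)) (n m dx dy : Int)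
    (gInf : List (List (Option Int))) (f : Nat) (vis : List (List Bool)) :
    pvPersonLoopA land n m dx dy gInf (f + 1) vis [] = -1 := rfl

theorem pvPersonLoopA_cons (land : List (List String)) (n m dx dy : Int)
    (gInf : List (List (Option Int))) (f : Nat) (vis : List (List Bool)) (x y t : Int)
    (q : List (Int × Int × Int)) :
    pvPersonLoopA land n m dx dy gInf (f + 1) vis ((x, y, t) :: q) =
      if x = dx ∧ y = dy then t
      else pvPersonLoopA land n m dx dy gInf f
        (pvStep (pvCondPersonA land n m t gInf) (pvUmark t) x y (vis, [])).1
        (q ++ (pvStep (pvCondPersonA land n m t gInf) (pvUmark t) x y (vis, [])).2.map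
          (fun p => (p.1, p.2, t + 1))) := rfl

-- the flood queue loop computes the level-synchronous limit grid
theorem pvFloodA_levels (land : List (List String)) (n m : Int) :
    ∀ (N fuel : Nat) (g : List (List (Option Int))) (F B : List (Int × Int)) (t : Int),
      5 * fuel + B.length ≤ N →
      pvInvN n m t g →
      F.length + 2 * B.length + 3 * pvCount pvPnone g + 2 ≤ fuel →
      pvFloodLoopA land n m fuel g (pvTag t F ++ pvTag (t + 1) B) =
        (pvStages (pvCondFloodA land n m) pvUflood
          (pvCount pvPnone (pvExpand (pvCondFloodA land n m t) (pvUflood t) g F).1 + 1)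
          ((pvExpand (pvCondFloodA land n m t) (pvUflood t) g F).1,
            B ++ (pvExpand (pvCondFloodA land n m t) (pvUflood t) g F).2, t + 1)).1 := by
  intro N
  induction N using Nat.strong_induction_on with
  | _ N IH =>
    intro fuel g F B t hN hInv hB
    have hHp := pvHpushN land n m
    have hHw : ∀ (t : Int) (s : List (List (Option Int))), pvInvN n m t s → pvInvN n m (t + 1) s :=
      fun t s hs => pvInvN_weak n m t s hs
    rcases F with _ | ⟨⟨x, y⟩, F'⟩
    · rw [pvExpand_nil]
      dsimp only
      simp only [List.append_nil]
      rcases B with _ | ⟨q, B'⟩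
      · obtain ⟨f, rfl⟩ : ∃ f, fuel = f + 1 := ⟨fuel - 1, by omega⟩
        rw [pvStages_nil]
        simp only [pvTag, List.map_nil, List.nil_append]
        exact pvFloodLoopA_nil land n m f g
      · have hqueue : pvTag t [] ++ pvTag (t + 1) (q :: B') =
            pvTag (t + 1) (q :: B') ++ pvTag (t + 1 + 1) [] := by simp [pvTag]
        rw [hqueue]
        have hlen : (q :: B').length = B'.length + 1 := by simp
        have hnil0 : ([] : List (Int × Int)).length = 0 := rfl
        have hInv' := pvInvN_weak n m t g hInv
        have hnilL : ([] : List (Int × Int)).length = 0 := rfl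
        rw [IH (5 * fuel) (by omega) fuel g (q :: B') [] (t + 1) (by omega) hInv' (by omega)]
        simp only [List.nil_append]
        have hpeel := pvStages_succ (pvCondFloodA land n m) pvUflood (pvCount pvPnone g)
          (g, q :: B', t + 1)
        rw [hpeel, pvStage_def]
        obtain ⟨hI, hμ⟩ := pvExpand_inv (pvCondFloodA land n m (t + 1)) (pvUflood (t + 1))
          (pvInvN n m (t + 1)) (pvCount pvPnone) (fun s x y hs hc => hHp (t + 1) s x y hs hc)
          (q :: B') g hInv'
        rcases he : (pvExpand (pvCondFloodA land n m (t + 1)) (pvUflood (t + 1)) g (q :: B')).2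
          with _ | ⟨r, R⟩
        · rw [pvStages_nil, pvStages_nil]
        · rw [he] at hμ
          simp only [List.length_cons] at hμ
          exact pvStages_grid_stable (pvCondFloodA land n m) pvUflood (pvInvN n m)
            (pvCount pvPnone) hHp hHw _ _ _ (r :: R) (t + 1 + 1)
            (pvInvN_weak n m (t + 1) _ hI) (by omega) (by omega)
    · have hlenF : ((x, y) :: F').length = F'.length + 1 := by simp
      obtain ⟨f, rfl⟩ : ∃ f, fuel = f + 1 := ⟨fuel - 1, by omega⟩
      rw [pvTag_cons, List.cons_append, pvFloodLoopA_cons]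
      rw [show (pvTag t F' ++ pvTag (t + 1) B) ++
          (pvStep (pvCondFloodA land n m t) (pvUflood t) x y (g, [])).2.map
            (fun p => (p.1, p.2, t + 1)) =
          pvTag t F' ++ pvTag (t + 1)
            (B ++ (pvStep (pvCondFloodA land n m t) (pvUflood t) x y (g, [])).2) from by
        rw [pvTag_append, List.append_assoc]; rfl]
      obtain ⟨hI1, hμ1⟩ := pvStep_inv (pvCondFloodA land n m t) (pvUflood t) (pvInvN n m t)
        (pvCount pvPnone) (fun s x y hs hc => hHp t s x y hs hc) x y g [] hInv
      have hlen4 := pvStep_len (pvCondFloodA land n m t) (pvUflood t) x y g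
      have hlenB : (B ++ (pvStep (pvCondFloodA land n m t) (pvUflood t) x y (g, [])).2).length =
          B.length + (pvStep (pvCondFloodA land n m t) (pvUflood t) x y (g, [])).2.length := by
        simp
      have hnilL : ([] : List (Int × Int)).length = 0 := rfl
      rw [IH (5 * f + (B ++ (pvStep (pvCondFloodA land n m t) (pvUflood t) x y (g, [])).2).length)
        (by omega) f (pvStep (pvCondFloodA land n m t) (pvUflood t) x y (g, [])).1 F'
        (B ++ (pvStep (pvCondFloodA land n m t) (pvUflood t) x y (g, [])).2) t (by omega) hI1
        (by simp only [List.length_nil] at hμ1; omega)]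
      rw [pvExpand_cons]
      dsimp only
      simp only [List.append_assoc]

-- the answer of the person search from a partially processed level
def pvAnsA (land : List (List String)) (n m dx dy : Int) (gInf : List (List (Option Int)))
    (vis : List (List Bool)) (F B : List (Int × Int)) (t : Int) : Option Int :=
  if F.any (pvPdest dx dy) then some t
  else
    pvPlans (fun t => pvCondPersonA land n m t gInf) pvUmark (pvPdest dx dy)
      (pvCount pvPfalse (pvExpand (pvCondPersonA land n m t gInf) (pvUmark t) vis F).1 + 2)
      (pvExpand (pvCondPersonA land n m t gInf) (pvUmark t) vis F).1
      (B ++ (pvExpand (pvCondPersonA land n m t gInf) (pvUmark t) vis F).2) (t + 1)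

theorem pvPersonA_levels (land : List (List String)) (n m dx dy : Int)
    (gInf : List (List (Option Int))) :
    ∀ (N fuel : Nat) (vis : List (List Bool)) (F B : List (Int × Int)) (t : Int),
      5 * fuel + B.length ≤ N →
      pvShape vis n m →
      F.length + 2 * B.length + 3 * pvCount pvPfalse vis + 2 ≤ fuel →
      pvPersonLoopA land n m dx dy gInf fuel vis (pvTag t F ++ pvTag (t + 1) B) =
        (match pvAnsA land n m dx dy gInf vis F B t with | some r => r | none => -1) := by
  intro N
  induction N using Nat.strong_induction_on with
  | _ N IH =>
    intro fuel vis F B t hN hsh hB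
    have hHp := pvHpushMark n m (fun t => pvCondPersonA land n m t gInf)
      (fun t vis x y hc => pvCondPersonA_parts land n m t gInf vis x y hc)
    rcases F with _ | ⟨⟨x, y⟩, F'⟩
    · rcases B with _ | ⟨q, B'⟩
      · obtain ⟨f, rfl⟩ : ∃ f, fuel = f + 1 := ⟨fuel - 1, by omega⟩
        unfold pvAnsA
        rw [if_neg (show ¬ ([] : List (Int × Int)).any (pvPdest dx dy) = true by simp),
          pvExpand_nil]
        dsimp only
        simp only [List.append_nil]
        rw [pvPlans_nil _ _ _ _ (by omega)]
        simp only [pvTag, List.map_nil, List.nil_append]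
        exact pvPersonLoopA_nil land n m dx dy gInf f vis
      · have hqueue : pvTag t [] ++ pvTag (t + 1) (q :: B') =
            pvTag (t + 1) (q :: B') ++ pvTag (t + 1 + 1) [] := by simp [pvTag]
        rw [hqueue]
        have hlen : (q :: B').length = B'.length + 1 := by simp
        have hnilL : ([] : List (Int × Int)).length = 0 := rfl
        rw [IH (5 * fuel) (by omega) fuel vis (q :: B') [] (t + 1) (by omega) hsh (by omega)]
        have hAns : pvAnsA land n m dx dy gInf vis [] (q :: B') t =
            pvAnsA land n m dx dy gInf vis (q :: B') [] (t + 1) := by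
          unfold pvAnsA
          rw [if_neg (show ¬ ([] : List (Int × Int)).any (pvPdest dx dy) = true by simp),
            pvExpand_nil]
          dsimp only
          simp only [List.nil_append, List.append_nil]
          rw [pvPlans_pos _ _ _ _ (by omega)]
          rw [if_neg (show ¬ (q :: B' = []) by simp)]
          by_cases hany : (q :: B').any (pvPdest dx dy) = true
          · rw [if_pos hany, if_pos hany]
          · rw [if_neg hany, if_neg hany]
            obtain ⟨hI, hμ⟩ := pvExpand_inv (pvCondPersonA land n m (t + 1) gInf) (pvUmark (t + 1))
              (pvShape · n m) (pvCount pvPfalse)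
              (fun s x y hs hc => hHp (t + 1) s x y hs hc) (q :: B') vis hsh
            rcases he : (pvExpand (pvCondPersonA land n m (t + 1) gInf) (pvUmark (t + 1)) vis
              (q :: B')).2 with _ | ⟨r, R⟩
            · rw [pvPlans_nil _ _ _ _ (by omega), pvPlans_nil _ _ _ _ (by omega)]
            · rw [he] at hμ
              simp only [List.length_cons] at hμ
              exact pvPlans_stable (fun t => pvCondPersonA land n m t gInf) pvUmark
                (pvPdest dx dy) (fun _ vis => pvShape vis n m) (pvCount pvPfalse) hHp
                (fun t s hs => hs) _ _ _ (r :: R) (t + 1 + 1) hI (by omega) (by omega)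
        rw [hAns]
    · have hlenF : (((x, y) : Int × Int) :: F').length = F'.length + 1 := by simp
      obtain ⟨f, rfl⟩ : ∃ f, fuel = f + 1 := ⟨fuel - 1, by omega⟩
      rw [pvTag_cons, List.cons_append, pvPersonLoopA_cons]
      by_cases hdd : x = dx ∧ y = dy
      · rw [if_pos hdd]
        unfold pvAnsA
        rw [if_pos (show (((x, y) : Int × Int) :: F').any (pvPdest dx dy) = true by
          simp only [List.any_cons, Bool.or_eq_true]
          left
          simp [pvPdest]
          exact ⟨hdd.1, hdd.2⟩)]
      · rw [if_neg hdd]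
        rw [show (pvTag t F' ++ pvTag (t + 1) B) ++
            (pvStep (pvCondPersonA land n m t gInf) (pvUmark t) x y (vis, [])).2.map
              (fun p => (p.1, p.2, t + 1)) =
            pvTag t F' ++ pvTag (t + 1)
              (B ++ (pvStep (pvCondPersonA land n m t gInf) (pvUmark t) x y (vis, [])).2) from by
          rw [pvTag_append, List.append_assoc]; rfl]
        obtain ⟨hI1, hμ1⟩ := pvStep_inv (pvCondPersonA land n m t gInf) (pvUmark t)
          (pvShape · n m) (pvCount pvPfalse)
          (fun s x y hs hc => hHp t s x y hs hc) x y vis [] hsh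
        have hlen4 := pvStep_len (pvCondPersonA land n m t gInf) (pvUmark t) x y vis
        have hlenB : (B ++ (pvStep (pvCondPersonA land n m t gInf) (pvUmark t) x y (vis, [])).2).length =
            B.length + (pvStep (pvCondPersonA land n m t gInf) (pvUmark t) x y (vis, [])).2.length := by
          simp
        rw [IH (5 * f + (B ++ (pvStep (pvCondPersonA land n m t gInf) (pvUmark t) x y (vis, [])).2).length)
          (by omega) f (pvStep (pvCondPersonA land n m t gInf) (pvUmark t) x y (vis, [])).1 F'
          (B ++ (pvStep (pvCondPersonA land n m t gInf) (pvUmark t) x y (vis, [])).2) t (by omega) hI1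
          (by simp only [List.length_nil] at hμ1; omega)]
        have hAns : pvAnsA land n m dx dy gInf vis ((x, y) :: F') B t =
            pvAnsA land n m dx dy gInf
              (pvStep (pvCondPersonA land n m t gInf) (pvUmark t) x y (vis, [])).1 F'
              (B ++ (pvStep (pvCondPersonA land n m t gInf) (pvUmark t) x y (vis, [])).2) t := by
          unfold pvAnsA
          have hanyc : (((x, y) : Int × Int) :: F').any (pvPdest dx dy) = F'.any (pvPdest dx dy) := by
            simp only [List.any_cons]
            rw [show pvPdest dx dy (x, y) = false from by
              simp only [pvPdest, decide_eq_false_iff_not]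
              exact fun h => hdd ⟨h.1, h.2⟩]
            simp
          rw [hanyc]
          by_cases hany : F'.any (pvPdest dx dy) = true
          · rw [if_pos hany, if_pos hany]
          · rw [if_neg hany, if_neg hany]
            rw [pvExpand_cons]
            dsimp only
            simp only [List.append_assoc]
        rw [hAns]

-- ---------- Part 5: flood stages, numeric/boolean relation, threshold bridge ----------

def pvRelNB (g : List (List (Option Int))) (b : List (List Bool)) : Prop :=
  ∀ x y : Int, (pvGet2 g x y none = none ↔ pvGet2 b x y false = false)

def pvNst (land : List (List String)) (n m : Int) (g0 : List (List (Option Int)))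
    (F0 : List (Int × Int)) (k : Nat) : List (List (Option Int)) × List (Int × Int) × Int :=
  pvStages (pvCondFloodA land n m) pvUflood k (g0, F0, 0)

def pvBst (land : List (List String)) (n m : Int) (b0 : List (List Bool))
    (F0 : List (Int × Int)) (k : Nat) : List (List Bool) × List (Int × Int) × Int :=
  pvStages (fun _ => pvCondFloodB land n m) pvUmark k (b0, F0, 0)

def pvKf (land : List (List String)) (n m : Int) (g0 : List (List (Option Int)))
    (F0 : List (Int × Int)) : Nat :=
  pvCount pvPnone (pvNst land n m g0 F0 1).1 + 2

def pvGinf (land : List (List String)) (n m : Int) (g0 : List (List (Option Int)))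
    (F0 : List (Int × Int)) : List (List (Option Int)) :=
  (pvNst land n m g0 F0 (pvKf land n m g0 F0)).1

theorem pvExpand_pres {σ : Type} (C : σ → Int → Int → Bool) (U : σ → Int → Int → σ)
    (Inv : σ → Prop) (Q : σ → Prop)
    (h1 : ∀ s x y, Inv s → C s x y = true → Inv (U s x y))
    (h2 : ∀ s x y, Inv s → Q s → C s x y = true → Q (U s x y)) :
    ∀ (F : List (Int × Int)) (s : σ), Inv s → Q s →
      Inv (pvExpand C U s F).1 ∧ Q (pvExpand C U s F).1 := by
  have hstep : ∀ (x y : Int) (s : σ) (out : List (Int × Int)), Inv s → Q s →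
      Inv (pvStep C U x y (s, out)).1 ∧ Q (pvStep C U x y (s, out)).1 := by
    intro x y
    unfold pvStep
    generalize pvDirs = L
    induction L with
    | nil => intro s out hI hQ; exact ⟨hI, hQ⟩
    | cons d t ih =>
      intro s out hI hQ
      simp only [List.foldl_cons]
      by_cases hc : C s (x + d.1) (y + d.2) = true
      · rw [if_pos hc]
        exact ih _ _ (h1 s _ _ hI hc) (h2 s _ _ hI hQ hc)
      · rw [if_neg hc]
        exact ih s out hI hQ
  have main : ∀ (F : List (Int × Int)) (s : σ) (out : List (Int × Int)), Inv s → Q s →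
      Inv (F.foldl (fun a p => pvStep C U p.1 p.2 a) (s, out)).1 ∧
        Q (F.foldl (fun a p => pvStep C U p.1 p.2 a) (s, out)).1 := by
    intro F
    induction F with
    | nil => intro s out hI hQ; exact ⟨hI, hQ⟩
    | cons p t ih =>
      intro s out hI hQ
      simp only [List.foldl_cons]
      obtain ⟨hI1, hQ1⟩ := hstep p.1 p.2 s out hI hQ
      rcases hsp : pvStep C U p.1 p.2 (s, out) with ⟨s1, o1⟩
      rw [hsp] at hI1 hQ1
      simp only at hI1 hQ1
      exact ih s1 o1 hI1 hQ1
  intro F s hI hQ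
  exact main F s [] hI hQ

theorem pvCondFlood_eq (land : List (List String)) (n m t : Int)
    (g : List (List (Option Int))) (b : List (List Bool))
    (hInv : pvInvN n m t g) (hRel : pvRelNB g b) (x y : Int) :
    pvCondFloodA land n m t g x y = pvCondFloodB land n m b x y := by
  unfold pvCondFloodA pvCondFloodB
  congr 1
  cases hg : pvGet2 g x y none with
  | none =>
    have hb : pvGet2 b x y false = false := (hRel x y).mp hg
    rw [hb]
    rfl
  | some w =>
    have hb : pvGet2 b x y false = true := by
      cases hbv : pvGet2 b x y false with
      | false =>
        have hnone := (hRel x y).mpr hbv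
        rw [hnone] at hg
        simp at hg
      | true => rfl
    rw [hb]
    obtain ⟨hw0, hwle⟩ := hInv.2.2 x y w hg
    unfold pvInfGt
    simp only [Bool.not_true]
    rw [decide_eq_false (by omega : ¬ (t + 1 < w))]

theorem pvUpd_rel (land : List (List String)) (n m t : Int) :
    ∀ (g : List (List (Option Int))) (b : List (List Bool)) (x y : Int),
      (pvInvN n m t g ∧ pvShape b n m ∧ pvRelNB g b) → pvCondFloodA land n m t g x y = true →
      pvInvN n m t (pvUflood t g x y) ∧ pvShape (pvUmark t b x y) n m ∧
        pvRelNB (pvUflood t g x y) (pvUmark t b x y) := by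
  intro g b x y hR hc
  obtain ⟨hInv, hshB, hRel⟩ := hR
  refine ⟨(pvHpushN land n m t g x y hInv hc).1, pvShape_pvSet2 x y _ hshB, ?_⟩
  have hv : 0 ≤ x ∧ x < n ∧ 0 ≤ y ∧ y < m := by
    unfold pvCondFloodA at hc
    rw [Bool.and_eq_true, Bool.and_eq_true] at hc
    exact (pvValid_iff n m x y).mp hc.1.1
  intro x' y'
  unfold pvUflood pvUmark
  by_cases hxy : x' = x ∧ y' = y
  · obtain ⟨rfl, rfl⟩ := hxy
    rw [pvGet2_pvSet2_self _ none hInv.2.1 hv, pvGet2_pvSet2_self _ false hshB hv]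
    constructor
    · intro h; cases h
    · intro h; cases h
  · rw [pvGet2_pvSet2_ne g x' y' _ none (by omega) (by omega) hxy,
      pvGet2_pvSet2_ne b x' y' _ false (by omega) (by omega) hxy]
    exact hRel x' y'

theorem pvCondFloodA_none (land : List (List String)) (n m t : Int)
    (s : List (List (Option Int))) (x y : Int) (hInv : pvInvN n m t s)
    (hc : pvCondFloodA land n m t s x y = true) :
    pvGet2 s x y none = none ∧ (0 ≤ x ∧ x < n ∧ 0 ≤ y ∧ y < m) := by
  unfold pvCondFloodA at hc
  rw [Bool.and_eq_true, Bool.and_eq_true] at hc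
  obtain ⟨⟨hv, _⟩, hgt⟩ := hc
  rw [pvValid_iff] at hv
  refine ⟨?_, hv⟩
  cases hg : pvGet2 s x y none with
  | none => rfl
  | some w =>
    obtain ⟨hw0, hwle⟩ := hInv.2.2 x y w hg
    unfold pvInfGt at hgt
    rw [hg, decide_eq_true_iff] at hgt
    omega

theorem pvExpand_persist (land : List (List String)) (n m t : Int)
    (g : List (List (Option Int))) (F : List (Int × Int)) (hInv : pvInvN n m t g)
    (x y v : Int) (hv : pvGet2 g x y none = some v) :
    pvGet2 (pvExpand (pvCondFloodA land n m t) (pvUflood t) g F).1 x y none = some v := by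
  have := pvExpand_pres (pvCondFloodA land n m t) (pvUflood t) (pvInvN n m t)
    (fun s => pvGet2 s x y none = some v)
    (fun s x' y' hI hc => (pvHpushN land n m t s x' y' hI hc).1)
    (fun s x' y' hI hQ hc => by
      obtain ⟨hnone, hvr⟩ := pvCondFloodA_none land n m t s x' y' hI hc
      unfold pvUflood
      have hne : ¬ (x = x' ∧ y = y') := by
        intro ⟨rfl, rfl⟩
        rw [hQ] at hnone
        cases hnone
      rw [pvGet2_pvSet2_ne s x y _ none (by omega) (by omega) hne]
      exact hQ)
    F g hInv hv
  exact this.2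

theorem pvExpand_newval (land : List (List String)) (n m t : Int)
    (g : List (List (Option Int))) (F : List (Int × Int)) (hInv : pvInvN n m t g)
    (x y v : Int)
    (hv : pvGet2 (pvExpand (pvCondFloodA land n m t) (pvUflood t) g F).1 x y none = some v) :
    pvGet2 g x y none = some v ∨ v = t + 1 := by
  have := pvExpand_pres (pvCondFloodA land n m t) (pvUflood t) (pvInvN n m t)
    (fun s => pvGet2 s x y none = pvGet2 g x y none ∨ pvGet2 s x y none = some (t + 1))
    (fun s x' y' hI hc => (pvHpushN land n m t s x' y' hI hc).1)
    (fun s x' y' hI hQ hc => by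
      obtain ⟨hnone, hvr⟩ := pvCondFloodA_none land n m t s x' y' hI hc
      unfold pvUflood
      by_cases hxy : x = x' ∧ y = y'
      · obtain ⟨rfl, rfl⟩ := hxy
        right
        exact pvGet2_pvSet2_self _ none hI.2.1 hvr
      · rw [pvGet2_pvSet2_ne s x y _ none (by omega) (by omega) hxy]
        exact hQ)
    F g hInv (Or.inl rfl)
  rcases this.2 with he | he
  · left; rw [← he]; exact hv
  · rw [he] at hv
    right
    exact (Option.some_inj.mp hv).symm

theorem pvStageRel (land : List (List String)) (n m : Int) (g0 : List (List (Option Int)))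
    (b0 : List (List Bool)) (F0 : List (Int × Int))
    (hInv0 : pvInvN n m 0 g0) (hsh0 : pvShape b0 n m) (hRel0 : pvRelNB g0 b0) :
    ∀ k : Nat,
      (pvNst land n m g0 F0 k).2.2 = (k : Int) ∧
      pvInvN n m (k : Int) (pvNst land n m g0 F0 k).1 ∧
      (pvNst land n m g0 F0 k).2.1 = (pvBst land n m b0 F0 k).2.1 ∧
      pvShape (pvBst land n m b0 F0 k).1 n m ∧
      pvRelNB (pvNst land n m g0 F0 k).1 (pvBst land n m b0 F0 k).1 := by
  intro k
  induction k with
  | zero => exact ⟨rfl, by simpa using hInv0, rfl, hsh0, hRel0⟩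
  | succ k ih =>
    obtain ⟨ht, hInv, hF, hshB, hRel⟩ := ih
    have hn : pvNst land n m g0 F0 (k + 1) =
        pvStage (pvCondFloodA land n m) pvUflood (pvNst land n m g0 F0 k) :=
      Function.iterate_succ_apply' _ _ _
    have hbb : pvBst land n m b0 F0 (k + 1) =
        pvStage (fun _ => pvCondFloodB land n m) pvUmark (pvBst land n m b0 F0 k) :=
      Function.iterate_succ_apply' _ _ _
    rcases hNk : pvNst land n m g0 F0 k with ⟨gk, FNk, tk⟩
    rcases hBk : pvBst land n m b0 F0 k with ⟨bk, FBk, tbk⟩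
    rw [hNk] at hn ht hInv hF hRel
    rw [hBk] at hbb hF hshB hRel
    simp only at ht hInv hF hshB hRel
    subst ht
    subst hF
    rw [hn, hbb, pvStage_def, pvStage_def]
    have hcast : ((k + 1 : Nat) : Int) = (k : Int) + 1 := by push_cast; ring
    obtain ⟨hrel', hfeq⟩ := pvExpand_rel (pvCondFloodA land n m (k : Int)) (pvUflood (k : Int))
      (pvCondFloodB land n m) (pvUmark tbk)
      (fun g b => pvInvN n m (k : Int) g ∧ pvShape b n m ∧ pvRelNB g b)
      (fun g b x y hR => pvCondFlood_eq land n m (k : Int) g b hR.1 hR.2.2 x y)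
      (fun g b x y hR hc => pvUpd_rel land n m (k : Int) g b x y hR hc)
      FNk gk bk ⟨hInv, hshB, hRel⟩
    refine ⟨by simp only; rw [hcast], ?_, ?_, ?_, ?_⟩
    · simp only
      rw [hcast]
      exact pvInvN_weak n m (k : Int) _ hrel'.1
    · simp only
      exact hfeq
    · simp only
      exact hrel'.2.1
    · simp only
      exact hrel'.2.2

theorem pvNst_tight (land : List (List String)) (n m : Int) (g0 : List (List (Option Int)))
    (b0 : List (List Bool)) (F0 : List (Int × Int))
    (hInv0 : pvInvN n m 0 g0) (hsh0 : pvShape b0 n m) (hRel0 : pvRelNB g0 b0)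
    (hVals0 : ∀ x y v, pvGet2 g0 x y none = some v → v = 0) :
    ∀ (k : Nat) (x y v : Int), pvGet2 (pvNst land n m g0 F0 k).1 x y none = some v →
      0 ≤ v ∧ v ≤ (k : Int) := by
  intro k
  induction k with
  | zero =>
    intro x y v hv
    have := hVals0 x y v hv
    omega
  | succ k ih =>
    intro x y v hv
    have hn : pvNst land n m g0 F0 (k + 1) =
        pvStage (pvCondFloodA land n m) pvUflood (pvNst land n m g0 F0 k) :=
      Function.iterate_succ_apply' _ _ _
    obtain ⟨ht, hInv, _, _, _⟩ := pvStageRel land n m g0 b0 F0 hInv0 hsh0 hRel0 k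
    rcases hNk : pvNst land n m g0 F0 k with ⟨gk, FNk, tk⟩
    rw [hNk] at hn ht hInv
    simp only at ht hInv
    subst ht
    rw [hn, pvStage_def] at hv
    simp only at hv
    rcases pvExpand_newval land n m (k : Int) gk FNk hInv x y v hv with hold | hnew
    · have := ih x y v (by rw [hNk]; exact hold)
      push_cast
      omega
    · push_cast
      omega

theorem pvNst_persist (land : List (List String)) (n m : Int) (g0 : List (List (Option Int)))
    (b0 : List (List Bool)) (F0 : List (Int × Int))
    (hInv0 : pvInvN n m 0 g0) (hsh0 : pvShape b0 n m) (hRel0 : pvRelNB g0 b0) :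
    ∀ (j k : Nat), k ≤ j → ∀ (x y v : Int),
      pvGet2 (pvNst land n m g0 F0 k).1 x y none = some v →
      pvGet2 (pvNst land n m g0 F0 j).1 x y none = some v := by
  intro j
  induction j with
  | zero =>
    intro k hk x y v hv
    have : k = 0 := by omega
    subst this
    exact hv
  | succ j ih =>
    intro k hk x y v hv
    by_cases hkj : k = j + 1
    · subst hkj; exact hv
    · have hstep : pvGet2 (pvNst land n m g0 F0 j).1 x y none = some v :=
        ih k (by omega) x y v hv
      have hn : pvNst land n m g0 F0 (j + 1) =
          pvStage (pvCondFloodA land n m) pvUflood (pvNst land n m g0 F0 j) :=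
        Function.iterate_succ_apply' _ _ _
      obtain ⟨ht, hInv, _, _, _⟩ := pvStageRel land n m g0 b0 F0 hInv0 hsh0 hRel0 j
      rcases hNj : pvNst land n m g0 F0 j with ⟨gj, FNj, tj⟩
      rw [hNj] at hn ht hInv hstep
      simp only at ht hInv hstep
      subst ht
      rw [hn, pvStage_def]
      simp only
      exact pvExpand_persist land n m (j : Int) gj FNj hInv x y v hstep

theorem pvNst_descend (land : List (List String)) (n m : Int) (g0 : List (List (Option Int)))
    (b0 : List (List Bool)) (F0 : List (Int × Int))
    (hInv0 : pvInvN n m 0 g0) (hsh0 : pvShape b0 n m) (hRel0 : pvRelNB g0 b0) :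
    ∀ (j k : Nat), k ≤ j → ∀ (x y v : Int), v ≤ (k : Int) →
      pvGet2 (pvNst land n m g0 F0 j).1 x y none = some v →
      pvGet2 (pvNst land n m g0 F0 k).1 x y none = some v := by
  intro j
  induction j with
  | zero =>
    intro k hk x y v _ hv
    have : k = 0 := by omega
    subst this
    exact hv
  | succ j ih =>
    intro k hk x y v hvk hv
    by_cases hkj : k = j + 1
    · subst hkj; exact hv
    · have hn : pvNst land n m g0 F0 (j + 1) =
          pvStage (pvCondFloodA land n m) pvUflood (pvNst land n m g0 F0 j) :=
        Function.iterate_succ_apply' _ _ _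
      obtain ⟨ht, hInv, _, _, _⟩ := pvStageRel land n m g0 b0 F0 hInv0 hsh0 hRel0 j
      rcases hNj : pvNst land n m g0 F0 j with ⟨gj, FNj, tj⟩
      rw [hNj] at hn ht hInv
      simp only at ht hInv
      subst ht
      rw [hn, pvStage_def] at hv
      simp only at hv
      rcases pvExpand_newval land n m (j : Int) gj FNj hInv x y v hv with hold | hnew
      · exact ih k (by omega) x y v hvk (by rw [hNj]; exact hold)
      · exfalso
        have : (k : Int) ≤ (j : Int) := by exact_mod_cast Nat.cast_le.mpr (by omega)
        omega

theorem pvNst_stab (land : List (List String)) (n m : Int) (g0 : List (List (Option Int)))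
    (b0 : List (List Bool)) (F0 : List (Int × Int))
    (hInv0 : pvInvN n m 0 g0) (hsh0 : pvShape b0 n m) (hRel0 : pvRelNB g0 b0) :
    ∀ k : Nat, pvKf land n m g0 F0 ≤ k →
      (pvNst land n m g0 F0 k).1 = pvGinf land n m g0 F0 := by
  intro k hk
  obtain ⟨ht1, hInv1, _, _, _⟩ := pvStageRel land n m g0 b0 F0 hInv0 hsh0 hRel0 1
  rcases hN1 : pvNst land n m g0 F0 1 with ⟨g1, F1, t1⟩
  rw [hN1] at ht1 hInv1
  simp only at ht1 hInv1
  subst ht1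
  have hsplit : ∀ j : Nat, 1 ≤ j → pvNst land n m g0 F0 j =
      pvStages (pvCondFloodA land n m) pvUflood (j - 1) (g1, F1, (1 : Int)) := by
    intro j hj
    obtain ⟨i, rfl⟩ : ∃ i, j = i + 1 := ⟨j - 1, by omega⟩
    rw [Nat.add_sub_cancel]
    unfold pvNst pvStages
    rw [Function.iterate_add_apply]
    have h1 : (pvStage (pvCondFloodA land n m) pvUflood)^[1] (g0, F0, 0) = (g1, F1, 1) := by
      have := hN1
      unfold pvNst pvStages at this
      simpa using this
    rw [h1]
  have hKf : pvKf land n m g0 F0 = pvCount pvPnone g1 + 2 := by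
    unfold pvKf
    rw [hN1]
  unfold pvGinf
  rw [hsplit k (by unfold pvKf at hk; omega), hsplit (pvKf land n m g0 F0) (by unfold pvKf at hk; omega)]
  exact pvStages_grid_stable (pvCondFloodA land n m) pvUflood (pvInvN n m)
    (pvCount pvPnone) (pvHpushN land n m) (fun t s hs => pvInvN_weak n m t s hs)
    (k - 1) (pvKf land n m g0 F0 - 1) g1 F1 1 hInv1 (by omega) (by omega)

theorem pvFloodBridge (land : List (List String)) (n m : Int) (g0 : List (List (Option Int)))
    (b0 : List (List Bool)) (F0 : List (Int × Int))
    (hInv0 : pvInvN n m 0 g0) (hsh0 : pvShape b0 n m) (hRel0 : pvRelNB g0 b0)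
    (hVals0 : ∀ x y v, pvGet2 g0 x y none = some v → v = 0) :
    ∀ (k : Nat) (x y : Int),
      pvGet2 (pvBst land n m b0 F0 k).1 x y false = true ↔
        ∃ v : Int, 0 ≤ v ∧ v ≤ (k : Int) ∧ pvGet2 (pvGinf land n m g0 F0) x y none = some v := by
  intro k x y
  obtain ⟨_, _, _, _, hRel⟩ := pvStageRel land n m g0 b0 F0 hInv0 hsh0 hRel0 k
  constructor
  · intro hb
    have hne : ¬ pvGet2 (pvNst land n m g0 F0 k).1 x y none = none := by
      intro hnone
      rw [(hRel x y).mp hnone] at hb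
      cases hb
    cases hg : pvGet2 (pvNst land n m g0 F0 k).1 x y none with
    | none => exact absurd hg hne
    | some v =>
      obtain ⟨hv0, hvk⟩ := pvNst_tight land n m g0 b0 F0 hInv0 hsh0 hRel0 hVals0 k x y v hg
      refine ⟨v, hv0, hvk, ?_⟩
      by_cases hkK : k ≤ pvKf land n m g0 F0
      · exact pvNst_persist land n m g0 b0 F0 hInv0 hsh0 hRel0
          (pvKf land n m g0 F0) k hkK x y v hg
      · have hstab := pvNst_stab land n m g0 b0 F0 hInv0 hsh0 hRel0 k (by omega)
        rw [← hstab]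
        exact hg
  · intro ⟨v, hv0, hvk, hvG⟩
    have hsome : pvGet2 (pvNst land n m g0 F0 k).1 x y none = some v := by
      by_cases hkK : pvKf land n m g0 F0 ≤ k
      · rw [pvNst_stab land n m g0 b0 F0 hInv0 hsh0 hRel0 k hkK]
        exact hvG
      · have hKstab : pvGet2 (pvNst land n m g0 F0 (pvKf land n m g0 F0)).1 x y none = some v := by
          rw [pvNst_stab land n m g0 b0 F0 hInv0 hsh0 hRel0 (pvKf land n m g0 F0) (le_refl _)]
          exact hvG
        exact pvNst_descend land n m g0 b0 F0 hInv0 hsh0 hRel0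
          (pvKf land n m g0 F0) k (by omega) x y v hvk hKstab
    cases hb : pvGet2 (pvBst land n m b0 F0 k).1 x y false with
    | false =>
      rw [(hRel x y).mpr hb] at hsome
      cases hsome
    | true => rfl

-- ---------- Part 6a: initial scans ----------

theorem pvFoldPair {α β γ : Type} (step : α × β → γ → α × β) (f : α → γ → α) (h : β → γ → β)
    (hstep : ∀ p z, step p z = (f p.1 z, h p.2 z)) :
    ∀ (L : List γ) (a : α) (b : β), L.foldl step (a, b) = (L.foldl f a, L.foldl h b) := by
  intro L
  induction L with
  | nil => intro a b; rfl
  | cons z t ih =>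
    intro a b
    simp only [List.foldl_cons]
    rw [hstep (a, b) z]
    exact ih (f a z) (h b z)

theorem pvShape_replicate {α : Type} (n m : Nat) (a : α) :
    pvShape (List.replicate n (List.replicate m a)) (n : Int) (m : Int) := by
  constructor
  · simp
  · intro k hk
    rw [List.length_replicate] at hk
    rw [List.getElem?_replicate, if_pos hk]
    simp

theorem pvGet2_replicate {α : Type} (n m : Nat) (a : α) (x y : Int) (d : α)
    (hd : d = a) : pvGet2 (List.replicate n (List.replicate m a)) x y d = a := by
  subst hd
  unfold pvGet2
  split
  · by_cases hx : x.toNat < n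
    · rw [List.getElem?_replicate, if_pos hx]
      simp only [Option.getD_some]
      by_cases hy : y.toNat < m
      · rw [List.getElem?_replicate, if_pos hy]
        rfl
      · rw [List.getElem?_replicate, if_neg hy]
        rfl
    · rw [List.getElem?_replicate, if_neg hx]
      simp only [Option.getD_none]
      simp
  · rfl

-- one row of A's '*'-seeding scan
theorem pvRowFold (land : List (List String)) (n m : Int) (i : Int) (hi : 0 ≤ i ∧ i < n) :
    ∀ (js : List Int) (g : List (List (Option Int))), pvShape g n m →
      (∀ j ∈ js, 0 ≤ j ∧ j < m) →
      pvShape (js.foldl (fun g j => if pvCell land i j = "*" then pvSet2 g i j (some 0) else g) g) n m ∧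
      ∀ x y : Int,
        pvGet2 (js.foldl (fun g j => if pvCell land i j = "*" then pvSet2 g i j (some 0) else g) g) x y none =
          if x = i ∧ y ∈ js ∧ pvCell land i y = "*" then some 0 else pvGet2 g x y none := by
  intro js
  induction js with
  | nil =>
    intro g hg _
    refine ⟨hg, fun x y => ?_⟩
    rw [if_neg (by rintro ⟨_, h, _⟩; simp at h)]
    rfl
  | cons j js' ih =>
    intro g hg hjs
    have hj := hjs j (by simp)
    simp only [List.foldl_cons]
    by_cases hst : pvCell land i j = "*"
    · rw [if_pos hst]
      obtain ⟨hsh2, hpt⟩ := ih (pvSet2 g i j (some 0)) (pvShape_pvSet2 _ _ _ hg)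
        (fun j hj => hjs j (by simp [hj]))
      refine ⟨hsh2, fun x y => ?_⟩
      rw [hpt x y]
      by_cases hxy : x = i ∧ y = j
      · obtain ⟨rfl, rfl⟩ := hxy
        rw [pvGet2_pvSet2_self _ none hg ⟨by omega, by omega, by omega, by omega⟩]
        rw [ite_self]
        rw [if_pos ⟨rfl, by simp, hst⟩]
      · rw [pvGet2_pvSet2_ne g x y _ none (by omega) (by omega) hxy]
        by_cases hA : x = i ∧ y ∈ js' ∧ pvCell land i y = "*"
        · rw [if_pos hA, if_pos ⟨hA.1, by simp [hA.2.1], hA.2.2⟩]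
        · rw [if_neg hA, if_neg (by
            rintro ⟨rfl, hmem, hstar⟩
            rcases List.mem_cons.mp hmem with rfl | hm
            · exact hxy ⟨rfl, rfl⟩
            · exact hA ⟨rfl, hm, hstar⟩)]
    · rw [if_neg hst]
      obtain ⟨hsh2, hpt⟩ := ih g hg (fun j hj => hjs j (by simp [hj]))
      refine ⟨hsh2, fun x y => ?_⟩
      rw [hpt x y]
      by_cases hA : x = i ∧ y ∈ js' ∧ pvCell land i y = "*"
      · rw [if_pos hA, if_pos ⟨hA.1, by simp [hA.2.1], hA.2.2⟩]
      · rw [if_neg hA, if_neg (by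
          rintro ⟨rfl, hmem, hstar⟩
          rcases List.mem_cons.mp hmem with rfl | hm
          · exact hst hstar
          · exact hA ⟨rfl, hm, hstar⟩)]

theorem pvGridFold (land : List (List String)) (n m : Int) :
    ∀ (is : List Int) (g : List (List (Option Int))), pvShape g n m →
      (∀ i ∈ is, 0 ≤ i ∧ i < n) →
      pvShape (is.foldl (fun g i => (PySem.List.pyRange 0 m 1).foldl
        (fun g j => if pvCell land i j = "*" then pvSet2 g i j (some 0) else g) g) g) n m ∧
      ∀ x y : Int,
        pvGet2 (is.foldl (fun g i => (PySem.List.pyRange 0 m 1).foldl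
          (fun g j => if pvCell land i j = "*" then pvSet2 g i j (some 0) else g) g) g) x y none =
          if x ∈ is ∧ y ∈ PySem.List.pyRange 0 m 1 ∧ pvCell land x y = "*" then some 0
          else pvGet2 g x y none := by
  intro is
  induction is with
  | nil =>
    intro g hg _
    refine ⟨hg, fun x y => ?_⟩
    rw [if_neg (by rintro ⟨h, _, _⟩; simp at h)]
    rfl
  | cons i is' ih =>
    intro g hg his
    have hi := his i (by simp)
    simp only [List.foldl_cons]
    have hjs : ∀ j ∈ PySem.List.pyRange 0 m 1, (0:Int) ≤ j ∧ j < m := by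
      intro j hjm
      rw [PySem.List.mem_pyRange_one] at hjm
      exact hjm
    obtain ⟨hshr, hptr⟩ := pvRowFold land n m i hi (PySem.List.pyRange 0 m 1) g hg hjs
    obtain ⟨hsh2, hpt⟩ := ih _ hshr (fun i hi => his i (by simp [hi]))
    refine ⟨hsh2, fun x y => ?_⟩
    rw [hpt x y, hptr x y]
    by_cases hA : x ∈ is' ∧ y ∈ PySem.List.pyRange 0 m 1 ∧ pvCell land x y = "*"
    · rw [if_pos hA, if_pos ⟨by simp [hA.1], hA.2.1, hA.2.2⟩]
    · rw [if_neg hA]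
      by_cases hB : x = i ∧ y ∈ PySem.List.pyRange 0 m 1 ∧ pvCell land i y = "*"
      · obtain ⟨rfl, hy, hst⟩ := hB
        rw [if_pos ⟨rfl, hy, hst⟩, if_pos ⟨by simp, hy, hst⟩]
      · rw [if_neg hB, if_neg (by
          rintro ⟨hmem, hy, hst⟩
          rcases List.mem_cons.mp hmem with rfl | hm
          · exact hB ⟨rfl, hy, hst⟩
          · exact hA ⟨hm, hy, hst⟩)]

-- ---------- Part 6b: port-level bridges ----------

theorem pvInitSplit (land : List (List String)) (n m : Int) (g0 : List (List (Option Int)))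
    (q0 : List (Int × Int × Int)) :
    (PySem.List.pyRange 0 n 1).foldl (fun st i => (PySem.List.pyRange 0 m 1).foldl
      (fun st j => if pvCell land i j = "*" then (pvSet2 st.1 i j (some 0), st.2 ++ [(i, j, (0:Int))]) else st) st)
      (g0, q0) =
    ((PySem.List.pyRange 0 n 1).foldl (fun g i => (PySem.List.pyRange 0 m 1).foldl
        (fun g j => if pvCell land i j = "*" then pvSet2 g i j (some 0) else g) g) g0,
      (PySem.List.pyRange 0 n 1).foldl (fun q i => (PySem.List.pyRange 0 m 1).foldl
        (fun q j => if pvCell land i j = "*" then q ++ [(i, j, (0:Int))] else q) q) q0) := by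
  apply pvFoldPair
  intro p z
  have := pvFoldPair
    (fun st j => if pvCell land z j = "*" then (pvSet2 st.1 z j (some 0), st.2 ++ [(z, j, (0:Int))]) else st)
    (fun g j => if pvCell land z j = "*" then pvSet2 g z j (some 0) else g)
    (fun q j => if pvCell land z j = "*" then q ++ [(z, j, (0:Int))] else q)
    (fun p z' => by dsimp only; split <;> rfl)
    (PySem.List.pyRange 0 m 1) p.1 p.2
  simpa using this

theorem pvInitQueue (land : List (List String)) (n m : Int) :
    (PySem.List.pyRange 0 n 1).foldl (fun q i => (PySem.List.pyRange 0 m 1).foldl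
      (fun q j => if pvCell land i j = "*" then q ++ [(i, j, (0:Int))] else q) q)
      ([] : List (Int × Int × Int)) =
    pvTag 0 ((PySem.List.pyRange 0 n 1).flatMap (fun i =>
      ((PySem.List.pyRange 0 m 1).filter (fun j => pvCell land i j = "*")).map (fun j => (i, j)))) := by
  have hrow : ∀ (i : Int) (q : List (Int × Int × Int)),
      (PySem.List.pyRange 0 m 1).foldl
        (fun q j => if pvCell land i j = "*" then q ++ [(i, j, (0:Int))] else q) q =
      q ++ ((PySem.List.pyRange 0 m 1).filter (fun j => decide (pvCell land i j = "*"))).map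
        (fun j => (i, j, (0:Int))) := by
    intro i q
    exact PySem.List.foldl_append_ite (fun j => pvCell land i j = "*") (fun j => (i, j, (0:Int)))
      (PySem.List.pyRange 0 m 1) q
  rw [PySem.List.foldl_congr_mem (PySem.List.pyRange 0 n 1)
    (fun q i => List.foldl (fun q j => if pvCell land i j = "*" then q ++ [(i, j, (0:Int))] else q)
      q (PySem.List.pyRange 0 m 1))
    (fun q i => q ++ ((PySem.List.pyRange 0 m 1).filter
      (fun j => decide (pvCell land i j = "*"))).map (fun j => (i, j, (0:Int)))) []
    (fun acc x _ => hrow x acc)]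
  rw [PySem.List.foldl_append_eq_flatMap]
  rw [List.nil_append]
  unfold pvTag
  rw [List.map_flatMap]
  congr 1
  funext i
  rw [List.map_map]
  rfl

theorem pvB0_true (land : List (List String)) (n m : Int) (x y : Int) :
    pvGet2 ((PySem.List.pyRange 0 n 1).map (fun i =>
      (PySem.List.pyRange 0 m 1).map (fun j => decide (pvCell land i j = "*")))) x y false = true ↔
      ((0 ≤ x ∧ x < n ∧ 0 ≤ y ∧ y < m) ∧ pvCell land x y = "*") := by
  unfold pvGet2
  by_cases hxy : 0 ≤ x ∧ 0 ≤ y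
  · rw [if_pos hxy]
    by_cases hx : x < n
    · have hxlen : x.toNat < (PySem.List.pyRange 0 n 1).length := by
        rw [PySem.List.length_pyRange_one]; omega
      rw [List.getElem?_map, List.getElem?_eq_getElem hxlen]
      simp only [Option.map_some, Option.getD_some]
      have hxval : (PySem.List.pyRange 0 n 1)[x.toNat]'hxlen = x := by
        rw [PySem.List.getElem_pyRange_one]; omega
      rw [hxval]
      by_cases hy : y < m
      · have hylen : y.toNat < (PySem.List.pyRange 0 m 1).length := by
          rw [PySem.List.length_pyRange_one]; omega
        rw [List.getElem?_map, List.getElem?_eq_getElem hylen]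
        simp only [Option.map_some, Option.getD_some]
        have hyval : (PySem.List.pyRange 0 m 1)[y.toNat]'hylen = y := by
          rw [PySem.List.getElem_pyRange_one]; omega
        rw [hyval, decide_eq_true_iff]
        constructor
        · intro h; exact ⟨⟨hxy.1, hx, hxy.2, hy⟩, h⟩
        · intro h; exact h.2
      · have hlen : (PySem.List.pyRange 0 m 1).length ≤ y.toNat := by
          rw [PySem.List.length_pyRange_one]; omega
        rw [List.getElem?_map, List.getElem?_eq_none hlen]
        simp only [Option.map_none, Option.getD_none]
        constructor
        · intro h; cases h
        · rintro ⟨⟨_, _, _, h4⟩, _⟩; omega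
    · have hlen : (PySem.List.pyRange 0 n 1).length ≤ x.toNat := by
        rw [PySem.List.length_pyRange_one]; omega
      rw [List.getElem?_map, List.getElem?_eq_none hlen]
      simp only [Option.map_none, Option.getD_none, List.getElem?_nil]
      constructor
      · intro h; cases h
      · rintro ⟨⟨_, h2, _, _⟩, _⟩; omega
  · rw [if_neg hxy]
    constructor
    · intro h; cases h
    · rintro ⟨⟨h1, _, h3, _⟩, _⟩; exact absurd ⟨h1, h3⟩ hxy

theorem pvShape_b0 (land : List (List String)) (n m : Int) (hn : 0 ≤ n) (hm : 0 ≤ m) :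
    pvShape ((PySem.List.pyRange 0 n 1).map (fun i =>
      (PySem.List.pyRange 0 m 1).map (fun j => decide (pvCell land i j = "*")))) n m := by
  constructor
  · rw [List.length_map, PySem.List.length_pyRange_one]; omega
  · intro k hk
    rw [List.length_map, PySem.List.length_pyRange_one] at hk
    rw [List.getElem?_map, List.getElem?_eq_getElem (by rw [PySem.List.length_pyRange_one]; omega)]
    simp only [Option.map_some, Option.getD_some]
    rw [List.length_map, PySem.List.length_pyRange_one]
    omega

theorem pvFlatMap_len {α β : Type} (l : List α) (f : α → List β) (c : Nat)
    (h : ∀ a ∈ l, (f a).length ≤ c) : (l.flatMap f).length ≤ l.length * c := by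
  induction l with
  | nil => simp
  | cons a t ih =>
    rw [List.flatMap_cons, List.length_append, List.length_cons]
    have h1 := h a (by simp)
    have h2 := ih (fun a ha => h a (by simp [ha]))
    calc (f a).length + (t.flatMap f).length ≤ c + t.length * c := by omega
      _ = (t.length + 1) * c := by ring

theorem pvContains_any (front : List (Int × Int)) (dx dy : Int) :
    front.contains (dx, dy) = front.any (pvPdest dx dy) := by
  rw [List.contains_eq_any_beq]
  congr 1
  funext a
  rcases a with ⟨a1, a2⟩
  unfold pvPdest
  show ((dx, dy) == (a1, a2)) = decide (a1 = dx ∧ a2 = dy)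
  rw [show ((dx, dy) == (a1, a2)) = (decide (dx = a1) && decide (dy = a2)) from rfl]
  rw [Bool.decide_and]
  congr 1 <;> simp [eq_comm]

theorem pvExpand_congr {σ : Type} (C₁ C₂ : σ → Int → Int → Bool) (U : σ → Int → Int → σ)
    (h : ∀ s x y, C₁ s x y = C₂ s x y) (F : List (Int × Int)) (s : σ) :
    pvExpand C₁ U s F = pvExpand C₂ U s F := by
  have := pvExpand_rel C₁ U C₂ U (fun a b => a = b)
    (fun s₁ s₂ x y hR => by rw [hR]; exact h s₂ x y)
    (fun s₁ s₂ x y hR _ => by rw [hR]) F s s rfl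
  obtain ⟨h1, h2⟩ := this
  exact Prod.ext h1 h2

theorem pvPlans_congr {σ : Type} (Ct₁ Ct₂ : Int → σ → Int → Int → Bool)
    (Ut : Int → σ → Int → Int → σ) (P : Int × Int → Bool)
    (hC : ∀ t : Int, 0 ≤ t → ∀ s x y, Ct₁ t s x y = Ct₂ t s x y) :
    ∀ (fuel : Nat) (s : σ) (F : List (Int × Int)) (t : Int), 0 ≤ t →
      pvPlans Ct₁ Ut P fuel s F t = pvPlans Ct₂ Ut P fuel s F t := by
  intro fuel
  induction fuel with
  | zero => intro s F t ht; rfl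
  | succ f ih =>
    intro s F t ht
    rw [pvPlans_pos Ct₁ Ut P (f + 1) (by omega), pvPlans_pos Ct₂ Ut P (f + 1) (by omega)]
    simp only [Nat.add_sub_cancel]
    by_cases hF : F = []
    · rw [if_pos hF, if_pos hF]
    · rw [if_neg hF, if_neg hF]
      by_cases hany : F.any P = true
      · rw [if_pos hany, if_pos hany]
      · rw [if_neg hany, if_neg hany]
        rw [pvExpand_congr (Ct₁ t) (Ct₂ t) (Ut t) (hC t ht) F s]
        exact ih _ _ (t + 1) (by omega)

def pvCtP (land : List (List String)) (n m : Int) (b0 : List (List Bool))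
    (F0 : List (Int × Int)) : Int → List (List Bool) → Int → Int → Bool :=
  fun t vis x y => pvCondPersonB land n m (pvBst land n m b0 F0 (t + 1).toNat).1 vis x y

theorem pvCondPerson_eq (land : List (List String)) (n m : Int) (g0 : List (List (Option Int)))
    (b0 : List (List Bool)) (F0 : List (Int × Int))
    (hInv0 : pvInvN n m 0 g0) (hsh0 : pvShape b0 n m) (hRel0 : pvRelNB g0 b0)
    (hVals0 : ∀ x y v, pvGet2 g0 x y none = some v → v = 0) :
    ∀ (t : Int), 0 ≤ t → ∀ (vis : List (List Bool)) (x y : Int),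
      pvCondPersonA land n m t (pvGinf land n m g0 F0) vis x y =
        pvCtP land n m b0 F0 t vis x y := by
  intro t ht vis x y
  unfold pvCtP pvCondPersonA pvCondPersonB
  congr 1
  have hbridge := pvFloodBridge land n m g0 b0 F0 hInv0 hsh0 hRel0 hVals0 ((t + 1).toNat) x y
  rw [show (((t + 1).toNat : Nat) : Int) = t + 1 from by omega] at hbridge
  cases hg : pvGet2 (pvGinf land n m g0 F0) x y none with
  | none =>
    have hbf : pvGet2 (pvBst land n m b0 F0 (t + 1).toNat).1 x y false = false := by
      cases hbv : pvGet2 (pvBst land n m b0 F0 (t + 1).toNat).1 x y false with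
      | true =>
        obtain ⟨v, _, _, hvG⟩ := hbridge.mp hbv
        rw [hg] at hvG
        cases hvG
      | false => rfl
    rw [hbf]
    rfl
  | some v =>
    have hv0 : 0 ≤ v :=
      (pvNst_tight land n m g0 b0 F0 hInv0 hsh0 hRel0 hVals0 (pvKf land n m g0 F0) x y v hg).1
    by_cases hvt : v ≤ t + 1
    · have hb : pvGet2 (pvBst land n m b0 F0 (t + 1).toNat).1 x y false = true :=
        hbridge.mpr ⟨v, hv0, by omega, hg⟩
      rw [hb]
      show decide (t + 1 < v) = !true
      rw [decide_eq_false (by omega : ¬ (t + 1 < v))]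
      rfl
    · have hb : pvGet2 (pvBst land n m b0 F0 (t + 1).toNat).1 x y false = false := by
        cases hbv : pvGet2 (pvBst land n m b0 F0 (t + 1).toNat).1 x y false with
        | true =>
          obtain ⟨w, hw0, hwle, hwv⟩ := hbridge.mp hbv
          rw [hg] at hwv
          injection hwv with hwv'
          omega
        | false => rfl
      rw [hb]
      show decide (t + 1 < v) = !false
      rw [decide_eq_true (by omega : t + 1 < v)]
      rfl

theorem pvAnsA_plans (land : List (List String)) (n m dx dy : Int)
    (gInf : List (List (Option Int))) (vis : List (List Bool)) (p : Int × Int) (t : Int)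
    (hsh : pvShape vis n m) :
    pvAnsA land n m dx dy gInf vis [p] [] t =
      pvPlans (fun t => pvCondPersonA land n m t gInf) pvUmark (pvPdest dx dy)
        (pvCount pvPfalse vis + 2) vis [p] t := by
  have hHp := pvHpushMark n m (fun t => pvCondPersonA land n m t gInf)
    (fun t vis x y hc => pvCondPersonA_parts land n m t gInf vis x y hc)
  unfold pvAnsA
  rw [pvPlans_pos _ _ _ (pvCount pvPfalse vis + 2) (by omega)]
  rw [if_neg (show ¬ ([p] : List (Int × Int)) = [] by simp)]
  by_cases hany : ([p] : List (Int × Int)).any (pvPdest dx dy) = true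
  · rw [if_pos hany, if_pos hany]
  · rw [if_neg hany, if_neg hany]
    simp only [List.nil_append]
    obtain ⟨hI, hμ⟩ := pvExpand_inv (pvCondPersonA land n m t gInf) (pvUmark t)
      (pvShape · n m) (pvCount pvPfalse) (fun s x y hs hc => hHp t s x y hs hc) [p] vis hsh
    rcases he : (pvExpand (pvCondPersonA land n m t gInf) (pvUmark t) vis [p]).2 with _ | ⟨r, R⟩
    · rw [pvPlans_nil _ _ _ _ (by omega), pvPlans_nil _ _ _ _ (by omega)]
    · rw [he] at hμ
      simp only [List.length_cons, List.length_nil] at hμ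
      exact (pvPlans_stable (fun t => pvCondPersonA land n m t gInf) pvUmark (pvPdest dx dy)
        (fun _ vis => pvShape vis n m) (pvCount pvPfalse) hHp (fun t s hs => hs)
        _ _ _ (r :: R) (t + 1) hI (by omega) (by omega)).symm

theorem pvFloodStepB_bst (land : List (List String)) (n m : Int) (b0 : List (List Bool))
    (F0 : List (Int × Int)) (k : Nat) :
    pvFloodStepB land n m ((pvBst land n m b0 F0 k).1, (pvBst land n m b0 F0 k).2.1) =
      ((pvBst land n m b0 F0 (k + 1)).1, (pvBst land n m b0 F0 (k + 1)).2.1) := by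
  have hb : pvBst land n m b0 F0 (k + 1) =
      pvStage (fun _ => pvCondFloodB land n m) pvUmark (pvBst land n m b0 F0 k) :=
    Function.iterate_succ_apply' _ _ _
  rcases hBk : pvBst land n m b0 F0 k with ⟨bk, Fk, tk⟩
  rw [hBk] at hb
  rw [hb, pvStage_def]
  rfl

theorem pvLockstep_succ (land : List (List String)) (n m dx dy : Int) (f : Nat)
    (fl : List (List Bool) × List (Int × Int)) (vis : List (List Bool))
    (front : List (Int × Int)) (t : Int) :
    pvLockstep land n m dx dy (f + 1) fl vis front t =
      if front = [] then -1
      else if front.contains (dx, dy) then t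
      else pvLockstep land n m dx dy f (pvFloodStepB land n m fl)
        (pvExpand (pvCondPersonB land n m (pvFloodStepB land n m fl).1) (pvUmark t) vis front).1
        (pvExpand (pvCondPersonB land n m (pvFloodStepB land n m fl).1) (pvUmark t) vis front).2
        (t + 1) := rfl

theorem pvLockstep_plans (land : List (List String)) (n m dx dy : Int) (b0 : List (List Bool))
    (F0 : List (Int × Int)) :
    ∀ (fuel : Nat) (vis : List (List Bool)) (F : List (Int × Int)) (k : Nat),
      pvShape vis n m → pvCount pvPfalse vis + 2 ≤ fuel →
      pvLockstep land n m dx dy fuel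
        ((pvBst land n m b0 F0 k).1, (pvBst land n m b0 F0 k).2.1) vis F (k : Int) =
        (match pvPlans (pvCtP land n m b0 F0) pvUmark (pvPdest dx dy)
            (pvCount pvPfalse vis + 2) vis F (k : Int) with
          | some r => r | none => -1) := by
  intro fuel
  induction fuel with
  | zero => intro vis F k hsh hf; exact absurd hf (by omega)
  | succ f ih =>
    intro vis F k hsh hf
    have hHp := pvHpushMark n m (pvCtP land n m b0 F0)
      (fun t vis x y hc => pvCondPersonB_parts land n m _ vis x y hc)
    rw [pvLockstep_succ]
    rw [pvPlans_pos (pvCtP land n m b0 F0) pvUmark (pvPdest dx dy)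
      (pvCount pvPfalse vis + 2) (by omega)]
    by_cases hF : F = []
    · rw [if_pos hF, if_pos hF]
    · rw [if_neg hF, if_neg hF]
      rw [pvContains_any]
      by_cases hany : F.any (pvPdest dx dy) = true
      · rw [if_pos hany, if_pos hany]
      · rw [if_neg hany, if_neg hany]
        rw [pvFloodStepB_bst land n m b0 F0 k]
        have hCt : pvCtP land n m b0 F0 (k : Int) =
            pvCondPersonB land n m (pvBst land n m b0 F0 (k + 1)).1 := by
          funext vis' x y
          unfold pvCtP
          rw [show ((k : Int) + 1).toNat = k + 1 from by omega]
        rw [hCt]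
        rw [show pvCount pvPfalse vis + 2 - 1 = pvCount pvPfalse vis + 1 from by omega]
        obtain ⟨hI, hμ⟩ := pvExpand_inv (pvCondPersonB land n m (pvBst land n m b0 F0 (k + 1)).1)
          (pvUmark (k : Int)) (pvShape · n m) (pvCount pvPfalse)
          (fun s x y hs hc => pvHpushMark n m
            (fun _ => pvCondPersonB land n m (pvBst land n m b0 F0 (k + 1)).1)
            (fun t vis x y hc => pvCondPersonB_parts land n m _ vis x y hc) (k : Int) s x y hs hc)
          F vis hsh
        rcases he : (pvExpand (pvCondPersonB land n m (pvBst land n m b0 F0 (k + 1)).1)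
            (pvUmark (k : Int)) vis F).2 with _ | ⟨r, R⟩
        · obtain ⟨f', rfl⟩ : ∃ f', f = f' + 1 := ⟨f - 1, by omega⟩
          rw [pvLockstep_succ]
          rw [if_pos rfl]
          rw [pvPlans_nil _ _ _ _ (by omega)]
        · rw [he] at hμ
          simp only [List.length_cons] at hμ
          have hstep := ih (pvExpand (pvCondPersonB land n m (pvBst land n m b0 F0 (k + 1)).1)
            (pvUmark (k : Int)) vis F).1 (r :: R) (k + 1) hI (by omega)
          rw [show ((k + 1 : Nat) : Int) = (k : Int) + 1 from by push_cast; ring] at hstep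
          rw [hstep]
          have hstab := pvPlans_stable (pvCtP land n m b0 F0) pvUmark (pvPdest dx dy)
            (fun _ vis => pvShape vis n m) (pvCount pvPfalse) hHp (fun t s hs => hs)
            (pvCount pvPfalse (pvExpand (pvCondPersonB land n m (pvBst land n m b0 F0 (k + 1)).1)
              (pvUmark (k : Int)) vis F).1 + 2)
            (pvCount pvPfalse vis + 1)
            _ (r :: R) ((k : Int) + 1) hI (by omega) (by omega)
          rw [hstab]
theorem pvGinf_eq (land : List (List String)) (n m : Int) (g0 : List (List (Option Int)))
    (F0 : List (Int × Int)) :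
    (pvStages (pvCondFloodA land n m) pvUflood
      (pvCount pvPnone (pvExpand (pvCondFloodA land n m 0) (pvUflood 0) g0 F0).1 + 1)
      ((pvExpand (pvCondFloodA land n m 0) (pvUflood 0) g0 F0).1,
        [] ++ (pvExpand (pvCondFloodA land n m 0) (pvUflood 0) g0 F0).2, 0 + 1)).1 =
    pvGinf land n m g0 F0 := by
  rw [List.nil_append]
  have h1 : ((pvExpand (pvCondFloodA land n m 0) (pvUflood 0) g0 F0).1,
      (pvExpand (pvCondFloodA land n m 0) (pvUflood 0) g0 F0).2, (0:Int) + 1) =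
      pvStage (pvCondFloodA land n m) pvUflood (g0, F0, 0) := rfl
  rw [h1]
  unfold pvGinf pvKf pvNst pvStages
  rw [← Function.iterate_succ_apply]
  rfl

theorem pvMainEq (land : List (List String)) (sx sy dx dy : Int) :
    pvPersonLoopA land (land.length : Int) ((land.headD []).length : Int) dx dy
      (pvFloodLoopA land (land.length : Int) ((land.headD []).length : Int) (pvFuel land)
        ((PySem.List.pyRange 0 (land.length : Int) 1).foldl
          (fun g i => (PySem.List.pyRange 0 ((land.headD []).length : Int) 1).foldl
            (fun g j => if pvCell land i j = "*" then pvSet2 g i j (some 0) else g) g)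
          (List.replicate land.length (List.replicate (land.headD []).length (none : Option Int))))
        (pvTag 0 ((PySem.List.pyRange 0 (land.length : Int) 1).flatMap (fun i =>
          ((PySem.List.pyRange 0 ((land.headD []).length : Int) 1).filter
            (fun j => decide (pvCell land i j = "*"))).map (fun j => (i, j))))))
      (pvFuel land)
      (pvSet2 (List.replicate land.length (List.replicate (land.headD []).length false)) sx sy true)
      [(sx, sy, 0)] =
    pvLockstep land (land.length : Int) ((land.headD []).length : Int) dx dy (pvFuel land)
      ((PySem.List.pyRange 0 (land.length : Int) 1).map (fun i =>
        (PySem.List.pyRange 0 ((land.headD []).length : Int) 1).map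
          (fun j => decide (pvCell land i j = "*"))),
       (PySem.List.pyRange 0 (land.length : Int) 1).flatMap (fun i =>
        ((PySem.List.pyRange 0 ((land.headD []).length : Int) 1).filter
          (fun j => decide (pvCell land i j = "*"))).map (fun j => (i, j))))
      (pvSet2 (List.replicate land.length (List.replicate (land.headD []).length false)) sx sy true)
      [(sx, sy)] 0 := by
  have hΦbig : 4 * (land.length * (land.headD []).length) + 25 ≤ pvFuel land := by
    have h2 : (land.length * (land.headD []).length + 5) *
        (land.length * (land.headD []).length + 5) =
        (land.length * (land.headD []).length) * (land.length * (land.headD []).length) +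
          10 * (land.length * (land.headD []).length) + 25 := by ring
    have ha : 0 ≤ (land.length * (land.headD []).length) * (land.length * (land.headD []).length) :=
      Nat.zero_le _
    unfold pvFuel
    omega
  have hshR : pvShape (List.replicate land.length
      (List.replicate (land.headD []).length (none : Option Int)))
      (land.length : Int) ((land.headD []).length : Int) :=
    pvShape_replicate land.length (land.headD []).length none
  obtain ⟨hshG0, hptG0⟩ := pvGridFold land (land.length : Int) ((land.headD []).length : Int)
    (PySem.List.pyRange 0 (land.length : Int) 1)
    (List.replicate land.length (List.replicate (land.headD []).length (none : Option Int)))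
    hshR (fun i hi => (PySem.List.mem_pyRange_one).mp hi)
  have hrepl : ∀ x y : Int, pvGet2 (List.replicate land.length
      (List.replicate (land.headD []).length (none : Option Int))) x y none = none :=
    fun x y => pvGet2_replicate _ _ _ x y none rfl
  have hVals0 : ∀ x y v : Int, pvGet2 ((PySem.List.pyRange 0 (land.length : Int) 1).foldl
      (fun g i => (PySem.List.pyRange 0 ((land.headD []).length : Int) 1).foldl
        (fun g j => if pvCell land i j = "*" then pvSet2 g i j (some 0) else g) g)
      (List.replicate land.length (List.replicate (land.headD []).length (none : Option Int))))
      x y none = some v → v = 0 := by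
    intro x y v hv
    rw [hptG0 x y] at hv
    split at hv
    · cases hv; rfl
    · rw [hrepl x y] at hv; cases hv
  have hInv0 : pvInvN (land.length : Int) ((land.headD []).length : Int) 0
      ((PySem.List.pyRange 0 (land.length : Int) 1).foldl
        (fun g i => (PySem.List.pyRange 0 ((land.headD []).length : Int) 1).foldl
          (fun g j => if pvCell land i j = "*" then pvSet2 g i j (some 0) else g) g)
        (List.replicate land.length (List.replicate (land.headD []).length (none : Option Int)))) := by
    refine ⟨le_refl 0, hshG0, ?_⟩
    intro x y v hv
    have := hVals0 x y v hv
    omega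
  have hshb0 : pvShape ((PySem.List.pyRange 0 (land.length : Int) 1).map (fun i =>
      (PySem.List.pyRange 0 ((land.headD []).length : Int) 1).map
        (fun j => decide (pvCell land i j = "*"))))
      (land.length : Int) ((land.headD []).length : Int) :=
    pvShape_b0 land _ _ (by omega) (by omega)
  have hRel0 : pvRelNB ((PySem.List.pyRange 0 (land.length : Int) 1).foldl
      (fun g i => (PySem.List.pyRange 0 ((land.headD []).length : Int) 1).foldl
        (fun g j => if pvCell land i j = "*" then pvSet2 g i j (some 0) else g) g)
      (List.replicate land.length (List.replicate (land.headD []).length (none : Option Int))))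
      ((PySem.List.pyRange 0 (land.length : Int) 1).map (fun i =>
        (PySem.List.pyRange 0 ((land.headD []).length : Int) 1).map
          (fun j => decide (pvCell land i j = "*")))) := by
    intro x y
    rw [hptG0 x y, hrepl x y]
    constructor
    · intro hnone
      cases hbv : pvGet2 ((PySem.List.pyRange 0 (land.length : Int) 1).map (fun i =>
          (PySem.List.pyRange 0 ((land.headD []).length : Int) 1).map
            (fun j => decide (pvCell land i j = "*")))) x y false with
      | false => rfl
      | true =>
        obtain ⟨⟨hx0, hxn, hy0, hym⟩, hst⟩ := (pvB0_true land _ _ x y).mp hbv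
        rw [if_pos ⟨(PySem.List.mem_pyRange_one).mpr ⟨hx0, hxn⟩,
          (PySem.List.mem_pyRange_one).mpr ⟨hy0, hym⟩, hst⟩] at hnone
        cases hnone
    · intro hbf
      split
      · rename_i hc
        obtain ⟨hxm, hym, hst⟩ := hc
        exfalso
        have hbt := (pvB0_true land _ _ x y).mpr
          ⟨⟨((PySem.List.mem_pyRange_one).mp hxm).1, ((PySem.List.mem_pyRange_one).mp hxm).2,
            ((PySem.List.mem_pyRange_one).mp hym).1, ((PySem.List.mem_pyRange_one).mp hym).2⟩, hst⟩
        rw [hbf] at hbt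
        cases hbt
      · rfl
  have hcnt : pvCount pvPnone ((PySem.List.pyRange 0 (land.length : Int) 1).foldl
      (fun g i => (PySem.List.pyRange 0 ((land.headD []).length : Int) 1).foldl
        (fun g j => if pvCell land i j = "*" then pvSet2 g i j (some 0) else g) g)
      (List.replicate land.length (List.replicate (land.headD []).length (none : Option Int))))
      ≤ land.length * (land.headD []).length := by
    have h := pvCount_le_size pvPnone hshG0
    have h1 : ((PySem.List.pyRange 0 (land.length : Int) 1).foldl
        (fun g i => (PySem.List.pyRange 0 ((land.headD []).length : Int) 1).foldl
          (fun g j => if pvCell land i j = "*" then pvSet2 g i j (some 0) else g) g)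
        (List.replicate land.length (List.replicate (land.headD []).length (none : Option Int)))).length
        = land.length := by
      have := hshG0.1
      omega
    rw [h1] at h
    have h2 : ((land.headD []).length : Int).toNat = (land.headD []).length := by omega
    rw [h2] at h
    exact h
  have hF0len : ((PySem.List.pyRange 0 (land.length : Int) 1).flatMap (fun i =>
      ((PySem.List.pyRange 0 ((land.headD []).length : Int) 1).filter
        (fun j => decide (pvCell land i j = "*"))).map (fun j => (i, j)))).length ≤
      land.length * (land.headD []).length := by
    have h := pvFlatMap_len (PySem.List.pyRange 0 (land.length : Int) 1)
      (fun i => ((PySem.List.pyRange 0 ((land.headD []).length : Int) 1).filter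
        (fun j => decide (pvCell land i j = "*"))).map (fun j => ((i, j) : Int × Int)))
      (land.headD []).length
      (fun i _ => by
        rw [List.length_map]
        calc ((PySem.List.pyRange 0 ((land.headD []).length : Int) 1).filter
            (fun j => decide (pvCell land i j = "*"))).length
            ≤ (PySem.List.pyRange 0 ((land.headD []).length : Int) 1).length :=
              List.length_filter_le _ _
          _ = (land.headD []).length := by rw [PySem.List.length_pyRange_one]; omega)
    rw [PySem.List.length_pyRange_one] at h
    have h2 : ((land.length : Int) - 0).toNat = land.length := by omega
    rw [h2] at h
    exact h
  -- A's flood result is the level-synchronous limit grid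
  rw [show pvTag 0 ((PySem.List.pyRange 0 (land.length : Int) 1).flatMap (fun i =>
      ((PySem.List.pyRange 0 ((land.headD []).length : Int) 1).filter
        (fun j => decide (pvCell land i j = "*"))).map (fun j => (i, j)))) =
      pvTag 0 ((PySem.List.pyRange 0 (land.length : Int) 1).flatMap (fun i =>
        ((PySem.List.pyRange 0 ((land.headD []).length : Int) 1).filter
          (fun j => decide (pvCell land i j = "*"))).map (fun j => (i, j)))) ++ pvTag (0 + 1) []
      from by simp [pvTag]]
  rw [pvFloodA_levels land (land.length : Int) ((land.headD []).length : Int)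
    (5 * pvFuel land) (pvFuel land) _ _ [] 0 (by simp) hInv0
    (by simp only [List.length_nil]; omega)]
  rw [pvGinf_eq]
  -- A's person loop
  have hshvis : pvShape (pvSet2 (List.replicate land.length
      (List.replicate (land.headD []).length false)) sx sy true)
      (land.length : Int) ((land.headD []).length : Int) :=
    pvShape_pvSet2 _ _ _ (pvShape_replicate land.length (land.headD []).length false)
  have hcntvis : pvCount pvPfalse (pvSet2 (List.replicate land.length
      (List.replicate (land.headD []).length false)) sx sy true)
      ≤ land.length * (land.headD []).length := by
    have h := pvCount_le_size pvPfalse hshvis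
    have h1 : (pvSet2 (List.replicate land.length
        (List.replicate (land.headD []).length false)) sx sy true).length = land.length := by
      have := hshvis.1
      omega
    rw [h1] at h
    have h2 : ((land.headD []).length : Int).toNat = (land.headD []).length := by omega
    rw [h2] at h
    exact h
  rw [show [(sx, sy, (0 : Int))] = pvTag 0 [(sx, sy)] ++ pvTag (0 + 1) [] from by simp [pvTag]]
  rw [pvPersonA_levels land (land.length : Int) ((land.headD []).length : Int) dx dy _
    (5 * pvFuel land) (pvFuel land) _ [(sx, sy)] [] 0 (by simp) hshvis
    (by simp only [List.length_cons, List.length_nil]; omega)]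
  rw [pvAnsA_plans land (land.length : Int) ((land.headD []).length : Int) dx dy _ _ (sx, sy) 0
    hshvis]
  rw [pvPlans_congr _ _ pvUmark (pvPdest dx dy)
    (fun t ht s x y => pvCondPerson_eq land (land.length : Int) ((land.headD []).length : Int)
      _ _ _ hInv0 hshb0 hRel0 hVals0 t ht s x y)
    (pvCount pvPfalse (pvSet2 (List.replicate land.length
      (List.replicate (land.headD []).length false)) sx sy true) + 2) _ [(sx, sy)] 0 (le_refl 0)]
  -- B's lockstep
  have hLS := pvLockstep_plans land (land.length : Int) ((land.headD []).length : Int) dx dy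
    ((PySem.List.pyRange 0 (land.length : Int) 1).map (fun i =>
      (PySem.List.pyRange 0 ((land.headD []).length : Int) 1).map
        (fun j => decide (pvCell land i j = "*"))))
    ((PySem.List.pyRange 0 (land.length : Int) 1).flatMap (fun i =>
      ((PySem.List.pyRange 0 ((land.headD []).length : Int) 1).filter
        (fun j => decide (pvCell land i j = "*"))).map (fun j => (i, j))))
    (pvFuel land)
    (pvSet2 (List.replicate land.length (List.replicate (land.headD []).length false)) sx sy true)
    [(sx, sy)] 0 hshvis (by omega)
  simp only [Nat.cast_zero] at hLS
  rw [show pvBst land (land.length : Int) ((land.headD []).length : Int)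
      ((PySem.List.pyRange 0 (land.length : Int) 1).map (fun i =>
        (PySem.List.pyRange 0 ((land.headD []).length : Int) 1).map
          (fun j => decide (pvCell land i j = "*"))))
      ((PySem.List.pyRange 0 (land.length : Int) 1).flatMap (fun i =>
        ((PySem.List.pyRange 0 ((land.headD []).length : Int) 1).filter
          (fun j => decide (pvCell land i j = "*"))).map (fun j => (i, j)))) 0 =
      (((PySem.List.pyRange 0 (land.length : Int) 1).map (fun i =>
        (PySem.List.pyRange 0 ((land.headD []).length : Int) 1).map
          (fun j => decide (pvCell land i j = "*")))),
       ((PySem.List.pyRange 0 (land.length : Int) 1).flatMap (fun i =>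
        ((PySem.List.pyRange 0 ((land.headD []).length : Int) 1).filter
          (fun j => decide (pvCell land i j = "*"))).map (fun j => (i, j)))), (0 : Int))
      from rfl] at hLS
  dsimp only at hLS
  rw [hLS]

-- ===== VERDICT (by name: the statement is the Claim_ definition above) =====
theorem minimumSeconds_spec : Claim_equal_minimumSeconds := by
  intro land _ _
  unfold Spec_minimumSeconds minimumSeconds minimumSeconds_alt
  dsimp only
  generalize pvFindSD land (land.length : Int) ((land.headD []).length : Int) = sd
  rcases sd with ⟨sx, sy, dx, dy⟩
  dsimp only
  rw [pvInitSplit land (land.length : Int) ((land.headD []).length : Int)]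
  rw [pvInitQueue land (land.length : Int) ((land.headD []).length : Int)]
  dsimp only
  exact pvMainEq land sx sy dx dy
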